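-- pv_equiv track=rewrite | github.com/DutchFakeTuber/Advent_of_Code | 2024/Day 9/solution.py | partTwo
-- ===== SOURCE A (Python) =====
-- from collections import deque
-- from itertools import groupby
--
-- def scanDisk(data: list[int]) -> list[int | None]:
--     data: deque = deque(data)
--     disk: list[int | None] = []
--     count: int = 0
--     while data:
--         number: int = data.popleft()
--         disk += [count] * number
--         if data:
--             empty: int = data.popleft()
--             disk += [None] * empty
--         count += 1
--     return disk
--
-- def findBlock(disk: deque, size: int) -> int | None:
--     for idx, d in enumerate(reversed(disk)):
--         if type(d[1]) == int and d[2] <= size: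
--             return len(disk) - idx - 1
--     return None
--
-- def partTwo(data: list[int]) -> int:
--     disk: deque = deque([[idx, val, len(num)] for idx, (val, num) in enumerate((val, list(num)) for val, num in groupby(scanDisk(data)))])
--     moved: deque = deque()
--     while disk:
--         _, val, num = disk.popleft()
--         if val is not None:
--             moved.extend([val] * num)
--             continue
--         while num:
--             index: int = findBlock(disk, size=num)
--             if index is None:
--                 moved.extend([val] * num)
--                 break
--             i, value, number = disk[index]
--             disk[index] = [i, None, number]
--             moved.extend([value] * number)
--             num = num - number
--     return sum((x[0] if x[0] is not None else 0) * x[1] for x in zip(moved, range(len(moved))))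
-- ===== SOURCE B (Python) =====
-- def partTwo(data):
--     # Parse digits directly into a files list (pos, fid, length) and a gaps
--     # list [pos, length]; gaps merge across zero-length files.  Then run the
--     # classic per-file defrag: each file, rightmost first, moves to the first
--     # gap left of it that fits.
--     files = []
--     gaps = []
--     pos = fid = pend = 0
--     for k, n in enumerate(data):
--         if n < 0:
--             n = 0
--         if k % 2 == 0:
--             if n > 0:
--                 if pend:
--                     gaps.append([pos, pend])
--                     pos += pend
--                     pend = 0
--                 files.append((pos, fid, n))
--                 pos += n
--             fid += 1
--         else:
--             pend += n
--     if pend: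
--         gaps.append([pos, pend])
--     total = 0
--     for fpos, fid, ln in reversed(files):
--         dest = fpos
--         for g in gaps:
--             if g[0] < fpos and g[1] >= ln:
--                 dest = g[0]
--                 g[0] += ln
--                 g[1] -= ln
--                 break
--         total += fid * (ln * dest + ln * (ln - 1) // 2)
--     return total
-- ===== Notes on version B (the rewrite author's own statement) =====
-- stated objective: faster
-- what changed: B replaces A's gap-driven sweep over a materialized per-block disk (scanDisk + groupby + repeated reversed-deque scans filling each gap with the rightmost fitting file) by the dual file-driven greedy: one pass parses the digits straight into positioned file/gap lists, then each file, rightmost first, is moved to the first gap left of it that fits, with the checksum accumulated in closed form per file.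
import Mathlib
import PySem

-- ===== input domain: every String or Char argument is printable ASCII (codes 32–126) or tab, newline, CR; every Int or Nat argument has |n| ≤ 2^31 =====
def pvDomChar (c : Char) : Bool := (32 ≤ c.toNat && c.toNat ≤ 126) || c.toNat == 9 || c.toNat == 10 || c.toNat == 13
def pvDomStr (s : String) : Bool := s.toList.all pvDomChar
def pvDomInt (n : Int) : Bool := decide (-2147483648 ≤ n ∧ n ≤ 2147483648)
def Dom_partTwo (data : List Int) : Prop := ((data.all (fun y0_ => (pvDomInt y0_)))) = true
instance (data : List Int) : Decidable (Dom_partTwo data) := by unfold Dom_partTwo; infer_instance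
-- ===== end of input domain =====

-- B solves the defrag by the dual greedy: parse the digits into positioned file and gap
-- lists and move each file, rightmost first, into the first gap left of it that fits
-- (closed-form checksum), instead of A's per-gap rightmost-fit over a materialized disk;
-- the equivalence of the two greedy orders is proved below.

-- ===== PORT A =====
-- scanDisk: while data: popleft file blocks, popleft gap blocks, count += 1
def scanDiskGo : List Int → Int → List (Option Int) → List (Option Int)
  | [], _, disk => disk
  | n :: rest, count, disk =>
    let disk1 := disk ++ List.replicate n.toNat (some count)
    match rest with
    | [] => disk1
    | m :: rest2 => scanDiskGo rest2 (count + 1) (disk1 ++ List.replicate m.toNat none)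

def scanDisk (data : List Int) : List (Option Int) := scanDiskGo data 0 []

-- itertools.groupby with group length: adjacent equal values grouped, len(list(num)) as Int
def gbCons (v : Option Int) : List (Option Int × Int) → List (Option Int × Int)
  | (w, n) :: t => if v = w then (w, n + 1) :: t else (v, 1) :: (w, n) :: t
  | [] => [(v, 1)]

def pyGroupBy (xs : List (Option Int)) : List (Option Int × Int) := xs.foldr gbCons []

-- `for idx, d in enumerate(reversed(disk)): if type(d[1]) == int and d[2] <= size: return len(disk)-idx-1`
def findBlockGo : List (Int × Option Int × Int) → Int → Nat → Option Nat
  | [], _, _ => none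
  | d :: rest, size, idx =>
    if d.2.1.isSome && decide (d.2.2 ≤ size) then some idx else findBlockGo rest size (idx + 1)

def findBlock (disk : List (Int × Option Int × Int)) (size : Int) : Option Nat :=
  match findBlockGo disk.reverse size 0 with
  | some idx => some (disk.length - idx - 1)
  | none => none

-- the inner `while num:` loop of partTwo; the Nat argument is plain fuel making the
-- recursion structural (each iteration blanks one file run, so `disk.length + 1` at the
-- call site is never exhausted) -- a totality guard only, not part of the algorithm
def innerA : Nat → List (Int × Option Int × Int) → Int → List (Option Int) →
    List (Int × Option Int × Int) × List (Option Int)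
  | 0, disk, _, moved => (disk, moved)
  | fuel + 1, disk, num, moved =>
    if num = 0 then (disk, moved)
    else
      match findBlock disk num with
      | none => (disk, moved ++ List.replicate num.toNat none)
      | some index =>
        let t := disk.getD index (0, none, 0)
        innerA fuel (disk.set index (t.1, none, t.2.2)) (num - t.2.2)
          (moved ++ List.replicate t.2.2.toNat t.2.1)

-- the outer `while disk:` loop (fuel = number of runs, one popleft per step)
def outerA : Nat → List (Int × Option Int × Int) → List (Option Int) → List (Option Int)
  | 0, _, moved => moved
  | _ + 1, [], moved => moved
  | fuel + 1, t :: rest, moved =>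
    match t.2.1 with
    | some v => outerA fuel rest (moved ++ List.replicate t.2.2.toNat (some v))
    | none =>
      let p := innerA (rest.length + 1) rest t.2.2 moved
      outerA fuel p.1 p.2

-- sum((x[0] if x[0] is not None else 0) * x[1] for x in zip(moved, range(len(moved))))
def checksumA (moved : List (Option Int)) : Int :=
  (moved.zip (List.range moved.length)).foldl (fun acc x => acc + x.1.getD 0 * (x.2 : Int)) 0

def partTwo (data : List Int) : Int :=
  checksumA (outerA (PySem.List.enumerate (pyGroupBy (scanDisk data)) 0).length
    (PySem.List.enumerate (pyGroupBy (scanDisk data)) 0) [])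

-- ===== PORT B =====
-- one pass over the digits: files = (pos, fid, len) at even indices (len > 0),
-- gaps = (pos, len) accumulated from odd indices (merged across zero-length files)
def buildFG : List Int → Int → Int → Int → Int →
    List (Int × Int × Int) → List (Int × Int) → List (Int × Int × Int) × List (Int × Int)
  | [], _, _, pend, pos, files, gaps =>
    if pend > 0 then (files, gaps ++ [(pos, pend)]) else (files, gaps)
  | n0 :: rest, k, fid, pend, pos, files, gaps =>
    let n := if n0 < 0 then 0 else n0
    if k % 2 = 0 then
      if n > 0 then
        let gaps' := if pend > 0 then gaps ++ [(pos, pend)] else gaps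
        let pos' := if pend > 0 then pos + pend else pos
        buildFG rest (k + 1) (fid + 1) 0 (pos' + n) (files ++ [(pos', fid, n)]) gaps'
      else buildFG rest (k + 1) (fid + 1) pend pos files gaps
    else buildFG rest (k + 1) fid (pend + n) pos files gaps

-- `for g in gaps: if g[0] < fpos and g[1] >= ln: dest = g[0]; g[0] += ln; g[1] -= ln; break`
def placeB : List (Int × Int) → Int → Int → Int × List (Int × Int)
  | [], fpos, _ => (fpos, [])
  | (gp, gl) :: rest, fpos, ln =>
    if gp < fpos ∧ ln ≤ gl then (gp, (gp + ln, gl - ln) :: rest)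
    else
      let pr := placeB rest fpos ln
      (pr.1, (gp, gl) :: pr.2)

-- `for fpos, fid, ln in reversed(files): … total += fid * (ln * dest + ln*(ln-1)//2)`
def loopB : List (Int × Int × Int) → List (Int × Int) → Int → Int
  | [], _, total => total
  | (fpos, fid, ln) :: fs, gaps, total =>
    let pr := placeB gaps fpos ln
    loopB fs pr.2 (total + fid * (ln * pr.1 + ln * (ln - 1) / 2))

def partTwo_alt (data : List Int) : Int :=
  loopB (buildFG data 0 0 0 0 [] []).1.reverse (buildFG data 0 0 0 0 [] []).2 0

-- ===== PRECONDITION & SPEC =====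
def Spec_partTwo (data : List Int) (out : Int) : Prop := out = partTwo_alt data
instance (data : List Int) (out : Int) : Decidable (Spec_partTwo data out) := by unfold Spec_partTwo; infer_instance

-- ===== CLAIM (what is proved, stated in full; the proofs are below) =====
def Claim_equal_partTwo : Prop := ∀ (data : List Int), Dom_partTwo data → Spec_partTwo data (partTwo data)

-- ===== LEMMAS AND PROOFS =====

-- ---- Part I: A's dynamics as a closed-form sweep over (value, length) runs ----
-- (innerB/outerB below are proof-layer abstractions of A's loops: same gap-driven
-- rightmost-fit order, but run-length encoded with closed-form checksums)

theorem twoStepInduction {α : Type} {P : List α → Prop} (h0 : P []) (h1 : ∀ n, P [n])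
    (h2 : ∀ n m rest, P rest → P (n :: m :: rest)) : ∀ l, P l
  | [] => h0
  | [n] => h1 n
  | n :: m :: rest => h2 n m rest (twoStepInduction h0 h1 h2 rest)

def buildGo : List Int → Int → Int → Int → List (Option Int × Int) → List (Option Int × Int)
  | [], _, _, pend, runs => if pend > 0 then runs ++ [(none, pend)] else runs
  | n0 :: rest, k, fid, pend, runs =>
    let n := if n0 < 0 then 0 else n0
    if k % 2 = 0 then
      if n > 0 then
        buildGo rest (k + 1) (fid + 1) 0
          ((if pend > 0 then runs ++ [(none, pend)] else runs) ++ [(some fid, n)])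
      else buildGo rest (k + 1) (fid + 1) pend runs
    else buildGo rest (k + 1) fid (pend + n) runs

def buildRuns (data : List Int) : List (Option Int × Int) := buildGo data 0 0 0 []

def lastFitB (runs : List (Option Int × Int)) (g : Int) : Int :=
  (PySem.List.enumerate runs 0).foldl
    (fun j r => if r.2.1.isSome && decide (r.2.2 ≤ g) then r.1 else j) (-1)

def innerB : Nat → List (Option Int × Int) → Int → Int → Int →
    List (Option Int × Int) × Int × Int
  | 0, runs, _, pos, total => (runs, pos, total)
  | fuel + 1, runs, g, pos, total =>
    if g = 0 then (runs, pos, total)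
    else
      let j := lastFitB runs g
      if j < 0 then (runs, pos + g, total)
      else
        let r := runs.getD j.toNat (none, 0)
        innerB fuel (runs.set j.toNat (none, r.2)) (g - r.2) (pos + r.2)
          (total + r.1.getD 0 * (r.2 * pos + r.2 * (r.2 - 1) / 2))

def outerB : Nat → List (Option Int × Int) → Int → Int → Int
  | 0, _, _, total => total
  | _ + 1, [], _, total => total
  | fuel + 1, r :: rest, pos, total =>
    match r.1 with
    | some v => outerB fuel rest (pos + r.2) (total + v * (r.2 * pos + r.2 * (r.2 - 1) / 2))
    | none =>
      let p := innerB (rest.length + 1) rest r.2 pos total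
      outerB fuel p.1 p.2.1 p.2.2

-- ---- run-list construction: pyGroupBy (scanDisk data) = buildRuns data ----

def pushRun (v : Option Int) (k : Nat) : List (Option Int × Int) → List (Option Int × Int)
  | [] => [(v, (k : Int))]
  | (w, n) :: t => if v = w then (w, n + (k : Int)) :: t else (v, (k : Int)) :: (w, n) :: t

def gbRep (v : Option Int) (k : Nat) (l : List (Option Int × Int)) : List (Option Int × Int) :=
  if k = 0 then l else pushRun v k l

theorem gb_rep_append (v : Option Int) (k : Nat) (xs : List (Option Int)) :
    pyGroupBy (List.replicate k v ++ xs) = gbRep v k (pyGroupBy xs) := by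
  induction k with
  | zero => simp [gbRep]
  | succ k ih =>
    rw [List.replicate_succ, List.cons_append]
    have hc : pyGroupBy (v :: (List.replicate k v ++ xs)) =
        gbCons v (pyGroupBy (List.replicate k v ++ xs)) := rfl
    rw [hc, ih]
    unfold gbRep
    cases k with
    | zero =>
      simp only [if_pos rfl, Nat.add_eq, if_neg (Nat.succ_ne_zero 0)]
      cases hgb : pyGroupBy xs with
      | nil => simp [gbCons, pushRun]
      | cons hd t =>
        obtain ⟨w, n⟩ := hd
        by_cases hvw : v = w
        · subst hvw; simp [gbCons, pushRun]
        · simp [gbCons, pushRun, hvw]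
    | succ j =>
      simp only [if_neg (Nat.succ_ne_zero j), if_neg (Nat.succ_ne_zero (j + 1))]
      cases hgb : pyGroupBy xs with
      | nil =>
        simp [pushRun, gbCons]
        try push_cast
        try ring
      | cons hd t =>
        obtain ⟨w, n⟩ := hd
        by_cases hvw : v = w
        · subst hvw
          simp [pushRun, gbCons]
          try push_cast
          try ring
        · simp [pushRun, gbCons, hvw]
          try push_cast
          try ring

theorem pushRun_of_ne (v : Option Int) (k : Nat) (l : List (Option Int × Int))
    (h : ∀ r ∈ l, r.1 ≠ v) : pushRun v k l = (v, (k : Int)) :: l := by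
  cases l with
  | nil => rfl
  | cons hd t =>
    obtain ⟨w, n⟩ := hd
    have hw : w ≠ v := h (w, n) (List.mem_cons_self)
    have hvw : ¬ v = w := fun hh => hw hh.symm
    simp [pushRun, hvw]

theorem gb_mem_val (xs : List (Option Int)) : ∀ r ∈ pyGroupBy xs, r.1 ∈ xs := by
  induction xs with
  | nil => simp [pyGroupBy]
  | cons x xs ih =>
    intro r hr
    have hc : pyGroupBy (x :: xs) = gbCons x (pyGroupBy xs) := rfl
    rw [hc] at hr
    cases hgb : pyGroupBy xs with
    | nil =>
      rw [hgb] at hr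
      simp [gbCons] at hr
      simp [hr]
    | cons hd t =>
      obtain ⟨w, n⟩ := hd
      rw [hgb] at hr
      by_cases hvw : x = w
      · subst hvw
        simp only [gbCons, if_pos rfl] at hr
        rcases List.mem_cons.mp hr with h1 | h1
        · subst h1
          have := ih (x, n) (by rw [hgb]; exact List.mem_cons_self)
          exact List.mem_cons_of_mem _ this
        · have := ih r (by rw [hgb]; exact List.mem_cons_of_mem _ h1)
          exact List.mem_cons_of_mem _ this
      · simp only [gbCons, if_neg hvw] at hr
        rcases List.mem_cons.mp hr with h1 | h1
        · subst h1; exact List.mem_cons_self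
        · have := ih r (by rw [hgb]; exact h1)
          exact List.mem_cons_of_mem _ this

theorem gb_len_pos (xs : List (Option Int)) : ∀ r ∈ pyGroupBy xs, 1 ≤ r.2 := by
  induction xs with
  | nil => simp [pyGroupBy]
  | cons x xs ih =>
    intro r hr
    have hc : pyGroupBy (x :: xs) = gbCons x (pyGroupBy xs) := rfl
    rw [hc] at hr
    cases hgb : pyGroupBy xs with
    | nil =>
      rw [hgb] at hr
      simp [gbCons] at hr
      simp [hr]
    | cons hd t =>
      obtain ⟨w, n⟩ := hd
      have hn : 1 ≤ n := ih (w, n) (by rw [hgb]; exact List.mem_cons_self)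
      rw [hgb] at hr
      by_cases hvw : x = w
      · subst hvw
        simp only [gbCons, if_pos rfl] at hr
        rcases List.mem_cons.mp hr with h1 | h1
        · subst h1; simp; omega
        · exact ih r (by rw [hgb]; exact List.mem_cons_of_mem _ h1)
      · simp only [gbCons, if_neg hvw] at hr
        rcases List.mem_cons.mp hr with h1 | h1
        · subst h1; simp
        · exact ih r (by rw [hgb]; exact h1)

theorem scanDiskGo_acc (data : List Int) : ∀ (c : Int) (disk : List (Option Int)),
    scanDiskGo data c disk = disk ++ scanDiskGo data c [] := by
  induction data using twoStepInduction with
  | h0 => intro c disk; simp [scanDiskGo]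
  | h1 n => intro c disk; simp [scanDiskGo]
  | h2 n m rest ih =>
    intro c disk
    show scanDiskGo rest (c + 1) ((disk ++ _) ++ _) = _
    rw [ih (c + 1) ((disk ++ List.replicate n.toNat (some c)) ++ List.replicate m.toNat none)]
    have : scanDiskGo (n :: m :: rest) c [] =
        (([] ++ List.replicate n.toNat (some c)) ++ List.replicate m.toNat none) ++
          scanDiskGo rest (c + 1) [] := by
      show scanDiskGo rest (c + 1) _ = _
      rw [ih (c + 1)]
    rw [this]
    simp

theorem scanDiskGo_cons2 (n m : Int) (rest : List Int) (c : Int) :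
    scanDiskGo (n :: m :: rest) c [] =
      List.replicate n.toNat (some c) ++ List.replicate m.toNat none ++
        scanDiskGo rest (c + 1) [] := by
  have h : scanDiskGo (n :: m :: rest) c [] = scanDiskGo rest (c + 1)
      (([] ++ List.replicate n.toNat (some c)) ++ List.replicate m.toNat none) := rfl
  rw [h, scanDiskGo_acc rest (c + 1)]
  simp

theorem scanDisk_val (data : List Int) : ∀ (c : Int), ∀ v ∈ scanDiskGo data c [],
    v = none ∨ ∃ c', v = some c' ∧ c ≤ c' := by
  induction data using twoStepInduction with
  | h0 => intro c v hv; simp [scanDiskGo] at hv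
  | h1 n =>
    intro c v hv
    simp only [scanDiskGo, List.nil_append] at hv
    exact Or.inr ⟨c, List.eq_of_mem_replicate hv, le_refl c⟩
  | h2 n m rest ih =>
    intro c v hv
    rw [scanDiskGo_cons2] at hv
    rcases List.mem_append.mp hv with hv1 | hv2
    · rcases List.mem_append.mp hv1 with hva | hvb
      · exact Or.inr ⟨c, List.eq_of_mem_replicate hva, le_refl c⟩
      · exact Or.inl (List.eq_of_mem_replicate hvb)
    · rcases ih (c + 1) v hv2 with h | ⟨c', hc', hle⟩
      · exact Or.inl h
      · exact Or.inr ⟨c', hc', by omega⟩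

theorem buildGo_acc (data : List Int) : ∀ (k fid pend : Int) (runs : List (Option Int × Int)),
    buildGo data k fid pend runs = runs ++ buildGo data k fid pend [] := by
  induction data with
  | nil =>
    intro k fid pend runs
    simp only [buildGo]
    split_ifs <;> simp
  | cons n0 rest ih =>
    intro k fid pend runs
    simp only [buildGo]
    split_ifs
    all_goals rw [ih]
    all_goals conv_rhs => rw [ih]
    all_goals simp

theorem gb_head_ne (mt : Nat) (rest : List Int) (fid : Int) :
    ∀ r ∈ pyGroupBy (List.replicate mt none ++ scanDiskGo rest (fid + 1) []),
      r.1 ≠ some fid := by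
  intro r hr
  have hv := gb_mem_val _ r hr
  rcases List.mem_append.mp hv with h | h
  · simp [List.eq_of_mem_replicate h]
  · rcases scanDisk_val rest (fid + 1) _ h with h0 | ⟨c', hc', hle⟩
    · simp [h0]
    · rw [hc']
      intro hcon
      injection hcon with he
      omega

theorem gbRep_add (v : Option Int) (p q : Nat) (l : List (Option Int × Int)) :
    gbRep v (p + q) l = gbRep v p (gbRep v q l) := by
  unfold gbRep
  by_cases hq : q = 0
  · subst hq; simp
  · by_cases hp : p = 0
    · subst hp; simp
    · rw [if_neg (by omega : ¬ p + q = 0), if_neg hq, if_neg hp]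
      cases l with
      | nil =>
        simp [pushRun]
        push_cast
        ring
      | cons hd t =>
        obtain ⟨w, n⟩ := hd
        by_cases hvw : v = w
        · subst hvw
          simp [pushRun]
          push_cast
          ring
        · simp [pushRun, hvw]
          push_cast
          ring

theorem gb_rep_nil (v : Option Int) (k : Nat) :
    pyGroupBy (List.replicate k v) = gbRep v k [] := by
  have := gb_rep_append v k []
  simpa [pyGroupBy] using this

theorem buildGo_step (n0 : Int) (rest : List Int) (k fid pend : Int)
    (runs : List (Option Int × Int)) :
    buildGo (n0 :: rest) k fid pend runs =
      if k % 2 = 0 then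
        if (if n0 < 0 then (0 : Int) else n0) > 0 then
          buildGo rest (k + 1) (fid + 1) 0
            ((if pend > 0 then runs ++ [(none, pend)] else runs) ++
              [(some fid, if n0 < 0 then (0 : Int) else n0)])
        else buildGo rest (k + 1) (fid + 1) pend runs
      else buildGo rest (k + 1) fid (pend + (if n0 < 0 then (0 : Int) else n0)) runs := rfl

theorem build_eq_gb (data : List Int) : ∀ (k fid pend : Int), k % 2 = 0 → 0 ≤ pend →
    buildGo data k fid pend [] =
      pyGroupBy (List.replicate pend.toNat none ++ scanDiskGo data fid []) := by
  induction data using twoStepInduction with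
  | h0 =>
    intro k fid pend hk hp
    have hsd : scanDiskGo [] fid [] = [] := rfl
    rw [hsd, List.append_nil, gb_rep_nil]
    simp only [buildGo]
    unfold gbRep
    by_cases h : pend > 0
    · rw [if_pos h, if_neg (by omega : ¬ pend.toNat = 0)]
      simp [pushRun, Int.toNat_of_nonneg hp]
    · rw [if_neg h, if_pos (by omega : pend.toNat = 0)]
  | h1 n =>
    intro k fid pend hk hp
    have hsd : scanDiskGo [n] fid [] = List.replicate n.toNat (some fid) := by
      simp [scanDiskGo]
    rw [hsd, gb_rep_append, gb_rep_nil, buildGo_step, if_pos hk]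
    by_cases hn : (if n < 0 then (0 : Int) else n) > 0
    · have hn' : n > 0 := by by_cases h : n < 0 <;> simp [h] at hn <;> omega
      have hnn : (if n < 0 then (0 : Int) else n) = n := by simp [show ¬ n < 0 by omega]
      rw [if_pos hn, hnn]
      simp only [buildGo]
      rw [if_neg (by omega : ¬ (0 : Int) > 0)]
      unfold gbRep
      rw [if_neg (by omega : ¬ n.toNat = 0)]
      simp only [pushRun]
      by_cases hpd : pend > 0
      · rw [if_pos hpd, if_neg (by omega : ¬ pend.toNat = 0)]
        simp [Int.toNat_of_nonneg hp, Int.toNat_of_nonneg (le_of_lt hn')]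
      · rw [if_neg hpd, if_pos (by omega : pend.toNat = 0)]
        simp [Int.toNat_of_nonneg (le_of_lt hn')]
    · have hn0 : n.toNat = 0 := by by_cases h : n < 0 <;> simp [h] at hn <;> omega
      rw [if_neg hn]
      simp only [buildGo]
      rw [hn0]
      unfold gbRep
      rw [if_pos rfl]
      by_cases hpd : pend > 0
      · rw [if_pos hpd, if_neg (by omega : ¬ pend.toNat = 0)]
        simp [pushRun, Int.toNat_of_nonneg hp]
      · rw [if_neg hpd, if_pos (by omega : pend.toNat = 0)]
  | h2 n m rest ih =>
    intro k fid pend hk hp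
    have hm' : (if m < 0 then (0 : Int) else m) = (m.toNat : Int) := by
      by_cases h : m < 0 <;> simp [h] <;> omega
    rw [scanDiskGo_cons2]
    rw [show List.replicate pend.toNat (none : Option Int) ++
          (List.replicate n.toNat (some fid) ++ List.replicate m.toNat none ++
            scanDiskGo rest (fid + 1) []) =
        List.replicate pend.toNat (none : Option Int) ++
          (List.replicate n.toNat (some fid) ++ (List.replicate m.toNat none ++
            scanDiskGo rest (fid + 1) [])) from by simp [List.append_assoc]]
    rw [gb_rep_append, gb_rep_append]
    rw [buildGo_step, if_pos hk]
    by_cases hn : (if n < 0 then (0 : Int) else n) > 0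
    · have hn' : n > 0 := by by_cases h : n < 0 <;> simp [h] at hn <;> omega
      have hnn : (if n < 0 then (0 : Int) else n) = n := by simp [show ¬ n < 0 by omega]
      rw [if_pos hn, hnn]
      rw [buildGo_acc (m :: rest)]
      rw [buildGo_step m rest (k + 1) (fid + 1) 0, if_neg (by omega : ¬ (k + 1) % 2 = 0)]
      rw [ih (k + 1 + 1) (fid + 1) _ (by omega) (by rw [hm']; omega)]
      rw [show (0 + (if m < 0 then (0 : Int) else m)).toNat = m.toNat from by rw [hm']; omega]
      set G := pyGroupBy (List.replicate m.toNat (none : Option Int) ++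
        scanDiskGo rest (fid + 1) []) with hG
      have hrep : gbRep (some fid) n.toNat G = (some fid, (n.toNat : Int)) :: G := by
        unfold gbRep
        rw [if_neg (by omega : ¬ n.toNat = 0)]
        exact pushRun_of_ne _ _ _ (gb_head_ne m.toNat rest fid)
      rw [hrep]
      unfold gbRep
      by_cases hpd : pend > 0
      · rw [if_pos hpd, if_neg (by omega : ¬ pend.toNat = 0)]
        rw [show pushRun none pend.toNat ((some fid, (n.toNat : Int)) :: G) =
          (none, (pend.toNat : Int)) :: (some fid, (n.toNat : Int)) :: G from by
            simp [pushRun]]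
        simp [Int.toNat_of_nonneg hp, Int.toNat_of_nonneg (le_of_lt hn')]
      · rw [if_neg hpd, if_pos (by omega : pend.toNat = 0)]
        simp [Int.toNat_of_nonneg (le_of_lt hn')]
    · have hn0 : n.toNat = 0 := by by_cases h : n < 0 <;> simp [h] at hn <;> omega
      rw [if_neg hn]
      rw [buildGo_step m rest (k + 1) (fid + 1) pend, if_neg (by omega : ¬ (k + 1) % 2 = 0)]
      rw [ih (k + 1 + 1) (fid + 1) _ (by omega) (by rw [hm']; omega)]
      rw [hn0]
      rw [show gbRep (some fid) 0 (pyGroupBy (List.replicate m.toNat none ++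
        scanDiskGo rest (fid + 1) [])) = pyGroupBy (List.replicate m.toNat none ++
        scanDiskGo rest (fid + 1) []) from by unfold gbRep; rw [if_pos rfl]]
      rw [show (pend + (if m < 0 then (0 : Int) else m)).toNat = pend.toNat + m.toNat from by
        rw [hm']; omega]
      rw [gb_rep_append, gb_rep_append, gbRep_add]

theorem buildRuns_eq (data : List Int) : buildRuns data = pyGroupBy (scanDisk data) := by
  unfold buildRuns scanDisk
  rw [build_eq_gb data 0 0 0 (by norm_num) (le_refl 0)]
  simp

-- ---- checksum lemmas ----

def triInt (k : Nat) : Int := ((k * (k - 1) / 2 : Nat) : Int)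

theorem tri_succ (k : Nat) : (k + 1) * k / 2 = k * (k - 1) / 2 + k := by
  cases k with
  | zero => rfl
  | succ j =>
    simp only [Nat.add_sub_cancel]
    have h2 : (j + 1 + 1) * (j + 1) = (j + 1) * j + 2 * (j + 1) := by ring
    omega

theorem tri_int_eq (n : Int) (h : 0 ≤ n) : n * (n - 1) / 2 = triInt n.toNat := by
  unfold triInt
  obtain ⟨k, rfl⟩ : ∃ k : Nat, n = (k : Int) := ⟨n.toNat, (Int.toNat_of_nonneg h).symm⟩
  rw [Int.toNat_natCast]
  cases k with
  | zero => simp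
  | succ j =>
    simp only [Nat.add_sub_cancel]
    obtain ⟨a, ha⟩ := Nat.even_mul_succ_self j
    have hc : (j + 1) * j = a + a := by rw [mul_comm]; exact ha
    have h2 : (j + 1) * j / 2 = a := by omega
    have h1 : ((j + 1 : Nat) : Int) * (((j + 1 : Nat) : Int) - 1) = ((j + 1) * j : Nat) := by
      push_cast; ring
    rw [h2, h1, hc]
    push_cast
    omega

theorem checksumA_snoc (m : List (Option Int)) (x : Option Int) :
    checksumA (m ++ [x]) = checksumA m + x.getD 0 * (m.length : Int) := by
  unfold checksumA
  rw [show (m ++ [x]).length = m.length + 1 from by simp, List.range_succ,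
    List.zip_append (by simp), List.foldl_append]
  simp

theorem checksumA_rep_none (m : List (Option Int)) (k : Nat) :
    checksumA (m ++ List.replicate k none) = checksumA m := by
  induction k generalizing m with
  | zero => simp
  | succ j ih =>
    rw [List.replicate_succ', ← List.append_assoc, checksumA_snoc, ih]
    simp

theorem checksumA_rep_some (m : List (Option Int)) (k : Nat) (v : Int) :
    checksumA (m ++ List.replicate k (some v)) =
      checksumA m + v * (k * (m.length : Int) + triInt k) := by
  induction k generalizing m with
  | zero => simp [triInt]
  | succ j ih =>
    rw [List.replicate_succ', ← List.append_assoc, checksumA_snoc, ih]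
    have hl : ((m ++ List.replicate j (some v)).length : Int) = (m.length : Int) + j := by
      simp
    have ht : triInt (j + 1) = triInt j + j := by
      unfold triInt
      have := tri_succ j
      push_cast [this]
      ring
    rw [hl, ht]
    simp only [Option.getD_some]
    push_cast
    ring

-- ---- loop simulation: A's block-level loops = run-level closed-form loops ----

def lastIdx? {α : Type} (p : α → Bool) : List α → Option Nat
  | [] => none
  | x :: xs =>
    match lastIdx? p xs with
    | some j => some (j + 1)
    | none => if p x then some 0 else none

theorem lastIdx?_some {α : Type} {p : α → Bool} {xs : List α} {j : Nat}
    (h : lastIdx? p xs = some j) : ∃ h' : j < xs.length, p (xs[j]'h') = true := by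
  induction xs generalizing j with
  | nil => simp [lastIdx?] at h
  | cons x xs ih =>
    simp only [lastIdx?] at h
    cases hx : lastIdx? p xs with
    | some k =>
      rw [hx] at h
      obtain ⟨h', hp⟩ := ih hx
      cases h
      exact ⟨by simpa using Nat.succ_lt_succ h', by simpa using hp⟩
    | none =>
      rw [hx] at h
      by_cases hpx : p x = true
      · simp [hpx] at h; cases h; exact ⟨by simp, by simpa using hpx⟩
      · simp [hpx] at h

theorem findBlockGo_shift (l : List (Int × Option Int × Int)) (s : Int) (i : Nat) :
    findBlockGo l s i = (findBlockGo l s 0).map (i + ·) := by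
  induction l generalizing i with
  | nil => simp [findBlockGo]
  | cons d rest ih =>
    simp only [findBlockGo]
    by_cases hp : (d.2.1.isSome && decide (d.2.2 ≤ s)) = true
    · simp [hp]
    · simp only [hp, if_false, Bool.false_eq_true]
      rw [ih (i + 1), ih 1, Option.map_map]
      congr 1
      funext k
      simp [Function.comp]
      omega

theorem lastIdx?_concat {α : Type} (p : α → Bool) (xs : List α) (x : α) :
    lastIdx? p (xs ++ [x]) = if p x then some xs.length else lastIdx? p xs := by
  induction xs with
  | nil => simp [lastIdx?]
  | cons a xs ih =>
    simp only [List.cons_append, lastIdx?, ih]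
    by_cases hp : p x = true
    · simp [hp]
    · simp [hp]

theorem findBlock_eq (disk : List (Int × Option Int × Int)) (s : Int) :
    findBlock disk s = lastIdx? (fun d => d.2.1.isSome && decide (d.2.2 ≤ s)) disk := by
  induction disk using List.reverseRecOn with
  | nil => simp [findBlock, findBlockGo, lastIdx?]
  | append_singleton xs x ih =>
    rw [lastIdx?_concat]
    simp only [findBlock, List.reverse_append, List.reverse_cons, List.reverse_nil,
      List.nil_append, List.cons_append] at *
    simp only [findBlockGo]
    by_cases hp : (x.2.1.isSome && decide (x.2.2 ≤ s)) = true
    · simp [hp]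
    · simp only [hp, if_false, Bool.false_eq_true]
      rw [findBlockGo_shift _ _ 1]
      cases hf : findBlockGo xs.reverse s 0 with
      | none => simp [hf] at ih ⊢; simpa using ih
      | some idx =>
        simp only [hf, Option.map_some] at ih ⊢
        simp only [List.length_append, List.length_cons, List.length_nil] at *
        rw [← ih]
        congr 1
        omega

theorem findBlock_some {disk : List (Int × Option Int × Int)} {s : Int} {j : Nat}
    (h : findBlock disk s = some j) :
    ∃ h' : j < disk.length, (disk[j]'h').2.1.isSome = true ∧ (disk[j]'h').2.2 ≤ s := by
  rw [findBlock_eq] at h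
  obtain ⟨h', hp⟩ := lastIdx?_some h
  simp only [Bool.and_eq_true, decide_eq_true_eq] at hp
  exact ⟨h', hp.1, hp.2⟩

theorem lastFitB_go {p : (Option Int × Int) → Bool} (runs : List (Option Int × Int))
    (s j0 : Int) :
    (PySem.List.enumerate runs s).foldl (fun j r => if p r.2 then r.1 else j) j0 =
      (match lastIdx? p runs with
       | some k => s + (k : Int)
       | none => j0) := by
  induction runs generalizing s j0 with
  | nil => simp [lastIdx?, PySem.List.enumerate_nil]
  | cons r rest ih =>
    rw [PySem.List.enumerate_cons]
    simp only [List.foldl_cons, ih]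
    simp only [lastIdx?]
    cases hl : lastIdx? p rest with
    | some k => push_cast; ring_nf
    | none =>
      by_cases hp : p r = true
      · simp [hp]
      · simp [hp]

theorem lastFitB_eq (runs : List (Option Int × Int)) (g : Int) :
    lastFitB runs g =
      (match lastIdx? (fun r => r.1.isSome && decide (r.2 ≤ g)) runs with
       | some k => (k : Int)
       | none => -1) := by
  unfold lastFitB
  rw [lastFitB_go (p := fun r => r.1.isSome && decide (r.2 ≤ g))]
  cases lastIdx? (fun r => r.1.isSome && decide (r.2 ≤ g)) runs <;> simp

theorem lastIdx?_map {α β : Type} (p : β → Bool) (f : α → β) (l : List α) :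
    lastIdx? p (l.map f) = lastIdx? (fun x => p (f x)) l := by
  induction l with
  | nil => rfl
  | cons x xs ih => simp [lastIdx?, ih]

theorem innerA_succ_zero (fuel : Nat) (disk : List (Int × Option Int × Int))
    (moved : List (Option Int)) : innerA (fuel + 1) disk 0 moved = (disk, moved) := by
  rw [innerA]
  simp

theorem innerA_succ_none {disk : List (Int × Option Int × Int)} {num : Int} (fuel : Nat)
    (moved : List (Option Int)) (h : ¬ num = 0) (hf : findBlock disk num = none) :
    innerA (fuel + 1) disk num moved = (disk, moved ++ List.replicate num.toNat none) := by
  rw [innerA, if_neg h, hf]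

theorem innerA_succ_some {disk : List (Int × Option Int × Int)} {num : Int} {index : Nat}
    (fuel : Nat) (moved : List (Option Int)) (h : ¬ num = 0)
    (hf : findBlock disk num = some index) :
    innerA (fuel + 1) disk num moved =
      innerA fuel (disk.set index ((disk.getD index (0, none, 0)).1, none,
          (disk.getD index (0, none, 0)).2.2))
        (num - (disk.getD index (0, none, 0)).2.2)
        (moved ++ List.replicate (disk.getD index (0, none, 0)).2.2.toNat
          (disk.getD index (0, none, 0)).2.1) := by
  rw [innerA, if_neg h, hf]

theorem innerB_succ_zero (fuel : Nat) (runs : List (Option Int × Int)) (pos total : Int) :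
    innerB (fuel + 1) runs 0 pos total = (runs, pos, total) := by
  rw [innerB]
  simp

theorem innerB_succ_nofit {runs : List (Option Int × Int)} {g : Int} (fuel : Nat)
    (pos total : Int) (h : ¬ g = 0) (hj : lastFitB runs g < 0) :
    innerB (fuel + 1) runs g pos total = (runs, pos + g, total) := by
  rw [innerB, if_neg h]
  simp [hj]

theorem innerB_succ_fit {runs : List (Option Int × Int)} {g : Int} (fuel : Nat)
    (pos total : Int) (h : ¬ g = 0) (hj : ¬ lastFitB runs g < 0) :
    innerB (fuel + 1) runs g pos total =
      innerB fuel (runs.set (lastFitB runs g).toNat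
          (none, (runs.getD (lastFitB runs g).toNat (none, 0)).2))
        (g - (runs.getD (lastFitB runs g).toNat (none, 0)).2)
        (pos + (runs.getD (lastFitB runs g).toNat (none, 0)).2)
        (total + (runs.getD (lastFitB runs g).toNat (none, 0)).1.getD 0 *
          ((runs.getD (lastFitB runs g).toNat (none, 0)).2 * pos +
            (runs.getD (lastFitB runs g).toNat (none, 0)).2 *
              ((runs.getD (lastFitB runs g).toNat (none, 0)).2 - 1) / 2)) := by
  rw [innerB, if_neg h]
  simp [hj]

theorem outerA_succ_file {t : Int × Option Int × Int} {v : Int} (fuel : Nat)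
    (rest : List (Int × Option Int × Int)) (moved : List (Option Int))
    (hv : t.2.1 = some v) :
    outerA (fuel + 1) (t :: rest) moved =
      outerA fuel rest (moved ++ List.replicate t.2.2.toNat (some v)) := by
  rw [outerA, hv]

theorem outerA_succ_gap {t : Int × Option Int × Int} (fuel : Nat)
    (rest : List (Int × Option Int × Int)) (moved : List (Option Int))
    (hv : t.2.1 = none) :
    outerA (fuel + 1) (t :: rest) moved =
      outerA fuel (innerA (rest.length + 1) rest t.2.2 moved).1
        (innerA (rest.length + 1) rest t.2.2 moved).2 := by
  rw [outerA, hv]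

theorem outerB_succ_file {r : Option Int × Int} {v : Int} (fuel : Nat)
    (rest : List (Option Int × Int)) (pos total : Int) (hv : r.1 = some v) :
    outerB (fuel + 1) (r :: rest) pos total =
      outerB fuel rest (pos + r.2) (total + v * (r.2 * pos + r.2 * (r.2 - 1) / 2)) := by
  rw [outerB, hv]

theorem outerB_succ_gap {r : Option Int × Int} (fuel : Nat)
    (rest : List (Option Int × Int)) (pos total : Int) (hv : r.1 = none) :
    outerB (fuel + 1) (r :: rest) pos total =
      outerB fuel (innerB (rest.length + 1) rest r.2 pos total).1
        (innerB (rest.length + 1) rest r.2 pos total).2.1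
        (innerB (rest.length + 1) rest r.2 pos total).2.2 := by
  rw [outerB, hv]

theorem innerA_inv : ∀ (fuel : Nat) (disk : List (Int × Option Int × Int)) (num : Int)
    (moved : List (Option Int)), (∀ t ∈ disk, 1 ≤ t.2.2) →
    ∀ t ∈ (innerA fuel disk num moved).1, 1 ≤ t.2.2 := by
  intro fuel
  induction fuel with
  | zero => intro disk num moved hinv; exact hinv
  | succ fuel ih =>
    intro disk num moved hinv
    by_cases h : num = 0
    · subst h; rw [innerA_succ_zero]; exact hinv
    · cases hf : findBlock disk num with
      | none => rw [innerA_succ_none fuel moved h hf]; exact hinv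
      | some index =>
        rw [innerA_succ_some fuel moved h hf]
        apply ih
        intro u hu
        rcases List.mem_or_eq_of_mem_set hu with h1 | h1
        · exact hinv u h1
        · obtain ⟨hvl, _, _⟩ := findBlock_some hf
          have hgetD : disk.getD index (0, none, 0) = disk[index] :=
            List.getD_eq_getElem _ _ hvl
          subst h1
          show 1 ≤ (disk.getD index (0, none, 0)).2.2
          rw [hgetD]
          exact hinv _ (List.getElem_mem hvl)

theorem inner_sim : ∀ (fuel : Nat) (disk : List (Int × Option Int × Int)) (num : Int)
    (moved : List (Option Int)), (∀ t ∈ disk, 1 ≤ t.2.2) → 0 ≤ num →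
    innerB fuel (disk.map (·.2)) num (moved.length : Int) (checksumA moved) =
      ((innerA fuel disk num moved).1.map (·.2),
        ((innerA fuel disk num moved).2.length : Int),
        checksumA (innerA fuel disk num moved).2) := by
  intro fuel
  induction fuel with
  | zero => intro disk num moved hinv hnum; rfl
  | succ fuel ih =>
    intro disk num moved hinv hnum
    by_cases h : num = 0
    · subst h
      rw [innerA_succ_zero, innerB_succ_zero]
    · cases hf : findBlock disk num with
      | none =>
        have hfit : lastIdx? (fun r => r.1.isSome && decide (r.2 ≤ num))
            (disk.map (·.2)) = none := by
          rw [lastIdx?_map]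
          exact (findBlock_eq disk num ▸ hf)
        have hlf : lastFitB (disk.map (·.2)) num = -1 := by rw [lastFitB_eq, hfit]
        rw [innerA_succ_none fuel moved h hf,
          innerB_succ_nofit fuel _ _ h (by rw [hlf]; norm_num)]
        refine congrArg _ (Prod.ext ?_ ?_)
        · simp
          omega
        · simp [checksumA_rep_none]
      | some index =>
        obtain ⟨hvl, hsome0, hle0⟩ := findBlock_some hf
        have hgetD : disk.getD index (0, none, 0) = disk[index] :=
          List.getD_eq_getElem _ _ hvl
        have hsome : (disk.getD index (0, none, 0)).2.1.isSome = true := by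
          rw [hgetD]; exact hsome0
        have hle : (disk.getD index (0, none, 0)).2.2 ≤ num := by rw [hgetD]; exact hle0
        have hlen1 : 1 ≤ (disk.getD index (0, none, 0)).2.2 := by
          rw [hgetD]; exact hinv _ (List.getElem_mem hvl)
        have hfit : lastIdx? (fun r => r.1.isSome && decide (r.2 ≤ num))
            (disk.map (·.2)) = some index := by
          rw [lastIdx?_map]
          exact (findBlock_eq disk num ▸ hf)
        have hlf : lastFitB (disk.map (·.2)) num = (index : Int) := by
          rw [lastFitB_eq, hfit]
        have hvlm : index < (disk.map (·.2)).length := by simpa using hvl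
        rw [innerA_succ_some fuel moved h hf,
          innerB_succ_fit fuel _ _ h (by rw [hlf]; omega)]
        have hr : (disk.map (·.2)).getD (lastFitB (disk.map (·.2)) num).toNat (none, 0) =
            (disk.getD index (0, none, 0)).2 := by
          rw [hlf, Int.toNat_natCast, List.getD_eq_getElem _ _ hvlm, List.getElem_map,
            ← hgetD]
        obtain ⟨v, hv⟩ := Option.isSome_iff_exists.mp hsome
        rw [hr, hlf, Int.toNat_natCast]
        have hset : (disk.map (·.2)).set index (none, (disk.getD index (0, none, 0)).2.2) =
            (disk.set index ((disk.getD index (0, none, 0)).1, none,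
              (disk.getD index (0, none, 0)).2.2)).map (·.2) := by
          rw [List.map_set]
        have hcs : checksumA moved + (disk.getD index (0, none, 0)).2.1.getD 0 *
            ((disk.getD index (0, none, 0)).2.2 * (moved.length : Int) +
              (disk.getD index (0, none, 0)).2.2 *
                ((disk.getD index (0, none, 0)).2.2 - 1) / 2) =
            checksumA (moved ++ List.replicate (disk.getD index (0, none, 0)).2.2.toNat
              (disk.getD index (0, none, 0)).2.1) := by
          rw [hv, checksumA_rep_some]
          rw [tri_int_eq (disk.getD index (0, none, 0)).2.2 (by omega)]
          rw [Int.toNat_of_nonneg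
            (by omega : (0 : Int) ≤ (disk.getD index (0, none, 0)).2.2)]
          simp
        have hpos : (moved.length : Int) + (disk.getD index (0, none, 0)).2.2 =
            (((moved ++ List.replicate (disk.getD index (0, none, 0)).2.2.toNat
              (disk.getD index (0, none, 0)).2.1).length : Nat) : Int) := by
          rw [List.length_append, List.length_replicate]
          push_cast
          rw [Int.toNat_of_nonneg
            (by omega : (0 : Int) ≤ (disk.getD index (0, none, 0)).2.2)]
        rw [hset, hcs, hpos]
        exact ih _ _ _
          (by
            intro u hu
            rcases List.mem_or_eq_of_mem_set hu with h1 | h1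
            · exact hinv u h1
            · subst h1
              show 1 ≤ (disk.getD index (0, none, 0)).2.2
              exact hlen1)
          (sub_nonneg.mpr hle)

theorem outer_sim : ∀ (fuel : Nat) (disk : List (Int × Option Int × Int))
    (moved : List (Option Int)), (∀ t ∈ disk, 1 ≤ t.2.2) →
    outerB fuel (disk.map (·.2)) (moved.length : Int) (checksumA moved) =
      checksumA (outerA fuel disk moved) := by
  intro fuel
  induction fuel with
  | zero => intro disk moved hinv; rfl
  | succ fuel ih =>
    intro disk moved hinv
    cases disk with
    | nil => rfl
    | cons t rest =>
      have hlen1 : 1 ≤ t.2.2 := hinv t List.mem_cons_self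
      have hinvr : ∀ u ∈ rest, 1 ≤ u.2.2 := fun u hu => hinv u (List.mem_cons_of_mem _ hu)
      rw [List.map_cons]
      cases hv : t.2.1 with
      | some v =>
        rw [outerA_succ_file fuel rest moved hv,
          outerB_succ_file fuel (rest.map (·.2)) _ _
            (show ((fun (x : Int × Option Int × Int) => x.2) t).1 = some v from hv)]
        have hpos : (moved.length : Int) + t.2.2 =
            (((moved ++ List.replicate t.2.2.toNat (some v)).length : Nat) : Int) := by
          rw [List.length_append, List.length_replicate]
          push_cast
          rw [Int.toNat_of_nonneg (by omega : (0 : Int) ≤ t.2.2)]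
        have hcs : checksumA moved + v * (t.2.2 * (moved.length : Int) +
            t.2.2 * (t.2.2 - 1) / 2) =
            checksumA (moved ++ List.replicate t.2.2.toNat (some v)) := by
          rw [checksumA_rep_some, tri_int_eq t.2.2 (by omega),
            Int.toNat_of_nonneg (by omega : (0 : Int) ≤ t.2.2)]
        rw [hpos, hcs]
        exact ih rest _ hinvr
      | none =>
        rw [outerA_succ_gap fuel rest moved hv,
          outerB_succ_gap fuel (rest.map (·.2)) _ _
            (show ((fun (x : Int × Option Int × Int) => x.2) t).1 = none from hv)]
        rw [show (rest.map (fun (x : Int × Option Int × Int) => x.2)).length =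
          rest.length from by simp]
        rw [inner_sim (rest.length + 1) rest t.2.2 moved hinvr (by omega)]
        exact ih _ _ (innerA_inv (rest.length + 1) rest t.2.2 moved hinvr)

theorem A_to_outerB (data : List Int) :
    partTwo data = outerB (buildRuns data).length (buildRuns data) 0 0 := by
  unfold partTwo
  rw [buildRuns_eq]
  have hmap : (PySem.List.enumerate (pyGroupBy (scanDisk data)) 0).map (·.2) =
      pyGroupBy (scanDisk data) := PySem.List.map_snd_enumerate _ _
  have hinv : ∀ t ∈ PySem.List.enumerate (pyGroupBy (scanDisk data)) 0, 1 ≤ t.2.2 := by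
    intro t ht
    rcases (PySem.List.mem_enumerate_iff _ _ t).mp ht with ⟨k, hk, rfl⟩
    exact gb_len_pos _ _ (List.getElem_mem hk)
  have := outer_sim (PySem.List.enumerate (pyGroupBy (scanDisk data)) 0).length
    (PySem.List.enumerate (pyGroupBy (scanDisk data)) 0) [] hinv
  rw [hmap] at this
  simpa [checksumA] using this.symm


-- ---- Part II: position-annotated runs and the two greedy orders ----

-- annotate runs with their absolute start positions
def annR : Int → List (Option Int × Int) → List (Int × Option Int × Int)
  | _, [] => []
  | b, (v, l) :: t => (b, v, l) :: annR (b + l) t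

-- gap-driven sweep (A's order) on annotated runs
def innerS : Nat → List (Int × Option Int × Int) → Int → Int →
    List (Int × Option Int × Int) × Int
  | 0, rs, _, _ => (rs, 0)
  | fuel + 1, rs, g, p =>
    if g = 0 then (rs, 0)
    else
      match lastIdx? (fun r => r.2.1.isSome && decide (r.2.2 ≤ g)) rs with
      | none => (rs, 0)
      | some j =>
        let r := rs.getD j (0, none, 0)
        let pr := innerS fuel (rs.set j (r.1, none, r.2.2)) (g - r.2.2) (p + r.2.2)
        (pr.1, r.2.1.getD 0 * (r.2.2 * p + r.2.2 * (r.2.2 - 1) / 2) + pr.2)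

def outerS : Nat → List (Int × Option Int × Int) → Int
  | 0, _ => 0
  | _ + 1, [] => 0
  | fuel + 1, (p, v, l) :: rest =>
    match v with
    | some x => x * (l * p + l * (l - 1) / 2) + outerS fuel rest
    | none =>
      let pr := innerS (rest.length + 1) rest l p
      pr.2 + outerS fuel pr.1

-- right-to-left greedy fill of one gap (capacity g, cursor p): the same picks as
-- innerS, organized as one scan of the runs from the right
def greedyRev : List (Int × Option Int × Int) → Int → Int →
    List (Int × Option Int × Int) × Int
  | [], _, _ => ([], 0)
  | (q, vx, lx) :: t, g, p =>
    match vx with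
    | some v =>
      if lx ≤ g then
        let pr := greedyRev t (g - lx) (p + lx)
        ((q, none, lx) :: pr.1, v * (lx * p + lx * (lx - 1) / 2) + pr.2)
      else
        let pr := greedyRev t g p
        ((q, some v, lx) :: pr.1, pr.2)
    | none =>
      let pr := greedyRev t g p
      ((q, none, lx) :: pr.1, pr.2)

def greedyS (rs : List (Int × Option Int × Int)) (g p : Int) :
    List (Int × Option Int × Int) × Int :=
  ((greedyRev rs.reverse g p).1.reverse, (greedyRev rs.reverse g p).2)

-- file-driven semantics (B's order), on (pos, fid, len) files and (pos, len) gaps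
def CfunS : List (Int × Int × Int) → List (Int × Int) → Int
  | [], _ => 0
  | (fp, fid, ln) :: fs, gs =>
    fid * (ln * (placeB gs fp ln).1 + ln * (ln - 1) / 2) + CfunS fs (placeB gs fp ln).2

def filesOfS (rs : List (Int × Option Int × Int)) : List (Int × Int × Int) :=
  rs.filterMap (fun r => r.2.1.map (fun x => (r.1, x, r.2.2)))

def gapsOfS (rs : List (Int × Option Int × Int)) : List (Int × Int) :=
  rs.filterMap (fun r => if r.2.1.isSome then none else some (r.1, r.2.2))

def fcL (runs : List (Option Int × Int)) : Nat := (runs.filter (fun r => r.1.isSome)).length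

def fcS (rs : List (Int × Option Int × Int)) : Nat :=
  (rs.filter (fun r => r.2.1.isSome)).length

-- ---- bridge: the pos/total-accumulator sweep outerB = outerS on annotated runs ----

theorem annR_length (b : Int) (rs : List (Option Int × Int)) :
    (annR b rs).length = rs.length := by
  induction rs generalizing b with
  | nil => rfl
  | cons x t ih => simp [annR, ih]

theorem annR_getElem_snd (b : Int) (rs : List (Option Int × Int)) (j : Nat)
    (h : j < rs.length) :
    ((annR b rs)[j]'(by rw [annR_length]; exact h)).2 = rs[j] := by
  induction rs generalizing b j with
  | nil => simp at h
  | cons x t ih =>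
    cases j with
    | zero => simp [annR]
    | succ j => simpa [annR] using ih (b + x.2) j (by simpa using h)

theorem annR_set (b : Int) (rs : List (Option Int × Int)) (j : Nat) (v' : Option Int)
    (h : j < rs.length) :
    annR b (rs.set j (v', rs[j].2)) =
      (annR b rs).set j (((annR b rs)[j]'(by rw [annR_length]; exact h)).1, v', rs[j].2) := by
  induction rs generalizing b j with
  | nil => simp at h
  | cons x t ih =>
    cases j with
    | zero => simp [annR]
    | succ j =>
      have h' : j < t.length := by simpa using h
      simp only [List.set_cons_succ, List.getElem_cons_succ, annR, List.set_cons_succ]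
      exact congrArg _ (ih (b + x.2) j h')

theorem lastIdx?_annR (p : (Option Int × Int) → Bool) (b : Int)
    (rs : List (Option Int × Int)) :
    lastIdx? (fun r => p r.2) (annR b rs) = lastIdx? p rs := by
  induction rs generalizing b with
  | nil => rfl
  | cons x t ih => simp [annR, lastIdx?, ih]

theorem fcL_le (runs : List (Option Int × Int)) : fcL runs ≤ runs.length :=
  List.length_filter_le _ _

theorem fcL_set_none (runs : List (Option Int × Int)) (j : Nat) (l : Int)
    (h : j < runs.length) (hs : runs[j].1.isSome = true) :
    fcL (runs.set j (none, l)) + 1 = fcL runs := by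
  induction runs generalizing j with
  | nil => simp at h
  | cons x t ih =>
    cases j with
    | zero =>
      simp only [List.getElem_cons_zero] at hs
      simp [fcL, List.filter, hs]
    | succ j =>
      have h' : j < t.length := by simpa using h
      have hs' : t[j].1.isSome = true := by simpa using hs
      have := ih j h' hs'
      simp only [List.set_cons_succ, fcL, List.filter_cons]
      cases hx : x.1.isSome <;> simp_all [fcL]

theorem innerB_pos : ∀ (fuel : Nat) (runs : List (Option Int × Int)) (g pos total : Int),
    fcL runs < fuel → (innerB fuel runs g pos total).2.1 = pos + g := by
  intro fuel
  induction fuel with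
  | zero => intro runs g pos total h; omega
  | succ fuel ih =>
    intro runs g pos total h
    by_cases hg : g = 0
    · subst hg; rw [innerB_succ_zero]; simp
    · by_cases hj : lastFitB runs g < 0
      · rw [innerB_succ_nofit fuel _ _ hg hj]
      · rw [innerB_succ_fit fuel _ _ hg hj]
        obtain ⟨k, hk⟩ : ∃ k : Nat, lastIdx? (fun r => r.1.isSome && decide (r.2 ≤ g))
            runs = some k := by
          rw [lastFitB_eq] at hj
          cases hl : lastIdx? (fun r => r.1.isSome && decide (r.2 ≤ g)) runs with
          | none => rw [hl] at hj; norm_num at hj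
          | some k => exact ⟨k, rfl⟩
        have hkk : lastFitB runs g = (k : Int) := by rw [lastFitB_eq, hk]
        obtain ⟨hlt, hp⟩ := lastIdx?_some hk
        simp only [Bool.and_eq_true, decide_eq_true_eq] at hp
        have hget : runs.getD (lastFitB runs g).toNat (none, 0) = runs[k] := by
          rw [hkk, Int.toNat_natCast]; exact List.getD_eq_getElem _ _ hlt
        rw [ih _ _ _ _ (by
          rw [hkk, Int.toNat_natCast, List.getD_eq_getElem _ _ hlt]
          have := fcL_set_none runs k runs[k].2 hlt hp.1
          omega)]
        ring

theorem innerS_succ_zero (fuel : Nat) (rs : List (Int × Option Int × Int)) (p : Int) :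
    innerS (fuel + 1) rs 0 p = (rs, 0) := by
  rw [innerS]; simp

theorem innerS_succ_none {rs : List (Int × Option Int × Int)} {g : Int} (fuel : Nat)
    (p : Int) (h : ¬ g = 0)
    (hf : lastIdx? (fun r => r.2.1.isSome && decide (r.2.2 ≤ g)) rs = none) :
    innerS (fuel + 1) rs g p = (rs, 0) := by
  rw [innerS, if_neg h, hf]

theorem innerS_succ_some {rs : List (Int × Option Int × Int)} {g : Int} {j : Nat}
    (fuel : Nat) (p : Int) (h : ¬ g = 0)
    (hf : lastIdx? (fun r => r.2.1.isSome && decide (r.2.2 ≤ g)) rs = some j) :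
    innerS (fuel + 1) rs g p =
      ((innerS fuel (rs.set j ((rs.getD j (0, none, 0)).1, none, (rs.getD j (0, none, 0)).2.2))
          (g - (rs.getD j (0, none, 0)).2.2) (p + (rs.getD j (0, none, 0)).2.2)).1,
        (rs.getD j (0, none, 0)).2.1.getD 0 *
            ((rs.getD j (0, none, 0)).2.2 * p +
              (rs.getD j (0, none, 0)).2.2 * ((rs.getD j (0, none, 0)).2.2 - 1) / 2) +
          (innerS fuel (rs.set j ((rs.getD j (0, none, 0)).1, none,
              (rs.getD j (0, none, 0)).2.2))
            (g - (rs.getD j (0, none, 0)).2.2) (p + (rs.getD j (0, none, 0)).2.2)).2) := by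
  rw [innerS, if_neg h, hf]

theorem inner_bridge : ∀ (fuel : Nat) (runs : List (Option Int × Int)) (g p total b : Int),
    (innerB fuel runs g p total).2.2 = total + (innerS fuel (annR b runs) g p).2 ∧
    (innerS fuel (annR b runs) g p).1 = annR b (innerB fuel runs g p total).1 := by
  intro fuel
  induction fuel with
  | zero => intro runs g p total b; exact ⟨by simp [innerB, innerS], rfl⟩
  | succ fuel ih =>
    intro runs g p total b
    by_cases hg : g = 0
    · subst hg
      rw [innerB_succ_zero, innerS_succ_zero]
      exact ⟨by simp, rfl⟩
    · have hsel : lastIdx? (fun r => r.2.1.isSome && decide (r.2.2 ≤ g)) (annR b runs) =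
          lastIdx? (fun r => r.1.isSome && decide (r.2 ≤ g)) runs :=
        lastIdx?_annR (fun r => r.1.isSome && decide (r.2 ≤ g)) b runs
      cases hl : lastIdx? (fun r => r.1.isSome && decide (r.2 ≤ g)) runs with
      | none =>
        have hj : lastFitB runs g < 0 := by rw [lastFitB_eq, hl]; norm_num
        rw [innerB_succ_nofit fuel _ _ hg hj, innerS_succ_none fuel _ hg (by rw [hsel, hl])]
        exact ⟨by simp, rfl⟩
      | some k =>
        obtain ⟨hlt, hp⟩ := lastIdx?_some hl
        simp only [Bool.and_eq_true, decide_eq_true_eq] at hp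
        have hkk : lastFitB runs g = (k : Int) := by rw [lastFitB_eq, hl]
        have hj : ¬ lastFitB runs g < 0 := by rw [hkk]; omega
        have hget : runs.getD (lastFitB runs g).toNat (none, 0) = runs[k] := by
          rw [hkk, Int.toNat_natCast]; exact List.getD_eq_getElem _ _ hlt
        have hltA : k < (annR b runs).length := by rw [annR_length]; exact hlt
        have hgetA : (annR b runs).getD k (0, none, 0) = (annR b runs)[k] :=
          List.getD_eq_getElem _ _ hltA
        have hsnd : ((annR b runs)[k]'hltA).2 = runs[k] := annR_getElem_snd b runs k hlt
        rw [innerB_succ_fit fuel _ _ hg hj,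
          innerS_succ_some fuel _ hg (by rw [hsel, hl])]
        rw [hget, hkk, Int.toNat_natCast, hgetA]
        simp only [hsnd]
        have hsetA : (annR b runs).set k (((annR b runs)[k]'hltA).1, none, runs[k].2) =
            annR b (runs.set k (none, runs[k].2)) := by
          rw [annR_set b runs k none hlt]
        rw [hsetA]
        obtain ⟨h1, h2⟩ := ih (runs.set k (none, runs[k].2)) (g - runs[k].2)
          (p + runs[k].2)
          (total + runs[k].1.getD 0 * (runs[k].2 * p + runs[k].2 * (runs[k].2 - 1) / 2)) b
        constructor
        · rw [h1]; ring
        · exact h2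

theorem outer_bridge : ∀ (fuel : Nat) (runs : List (Option Int × Int)) (pos total : Int),
    outerB fuel runs pos total = total + outerS fuel (annR pos runs) := by
  intro fuel
  induction fuel with
  | zero => intro runs pos total; simp [outerB, outerS]
  | succ fuel ih =>
    intro runs pos total
    cases runs with
    | nil => simp [outerB, outerS, annR]
    | cons r rest =>
      obtain ⟨v, l⟩ := r
      cases v with
      | some x =>
        rw [outerB_succ_file fuel rest pos total rfl]
        show _ = total + outerS (fuel + 1) ((pos, some x, l) :: annR (pos + l) rest)
        rw [show outerS (fuel + 1) ((pos, some x, l) :: annR (pos + l) rest) =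
            x * (l * pos + l * (l - 1) / 2) + outerS fuel (annR (pos + l) rest) from rfl]
        rw [ih]
        ring
      | none =>
        rw [outerB_succ_gap fuel rest pos total rfl]
        show _ = total + outerS (fuel + 1) ((pos, none, l) :: annR (pos + l) rest)
        rw [show outerS (fuel + 1) ((pos, none, l) :: annR (pos + l) rest) =
            (innerS ((annR (pos + l) rest).length + 1) (annR (pos + l) rest) l pos).2 +
              outerS fuel (innerS ((annR (pos + l) rest).length + 1)
                (annR (pos + l) rest) l pos).1 from rfl]
        rw [annR_length]
        obtain ⟨h1, h2⟩ := inner_bridge (rest.length + 1) rest l pos total (pos + l)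
        have hpos : (innerB (rest.length + 1) rest l pos total).2.1 = pos + l :=
          innerB_pos (rest.length + 1) rest l pos total
            (Nat.lt_succ_of_le (fcL_le rest))
        rw [ih, h1, h2, hpos]
        ring

-- ---- greedy unfolding and skeleton lemmas ----

theorem greedyS_nil (g p : Int) : greedyS [] g p = ([], 0) := rfl

theorem greedyS_concat_take (rs : List (Int × Option Int × Int)) (q v lx g p : Int)
    (h : lx ≤ g) :
    greedyS (rs ++ [(q, some v, lx)]) g p =
      ((greedyS rs (g - lx) (p + lx)).1 ++ [(q, none, lx)],
        v * (lx * p + lx * (lx - 1) / 2) + (greedyS rs (g - lx) (p + lx)).2) := by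
  unfold greedyS
  rw [List.reverse_append]
  simp [greedyRev, h]

theorem greedyS_concat_skip (rs : List (Int × Option Int × Int)) (q v lx g p : Int)
    (h : ¬ lx ≤ g) :
    greedyS (rs ++ [(q, some v, lx)]) g p =
      ((greedyS rs g p).1 ++ [(q, some v, lx)], (greedyS rs g p).2) := by
  unfold greedyS
  rw [List.reverse_append]
  simp [greedyRev, h]

theorem greedyS_concat_none (rs : List (Int × Option Int × Int)) (q lx g p : Int) :
    greedyS (rs ++ [(q, none, lx)]) g p =
      ((greedyS rs g p).1 ++ [(q, none, lx)], (greedyS rs g p).2) := by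
  unfold greedyS
  rw [List.reverse_append]
  simp [greedyRev]

theorem greedyS_length (rs : List (Int × Option Int × Int)) (g p : Int) :
    (greedyS rs g p).1.length = rs.length := by
  induction rs using List.reverseRecOn generalizing g p with
  | nil => rfl
  | append_singleton rs x ih =>
    obtain ⟨q, vx, lx⟩ := x
    cases vx with
    | some v =>
      by_cases h : lx ≤ g
      · rw [greedyS_concat_take rs q v lx g p h]; simp [ih]
      · rw [greedyS_concat_skip rs q v lx g p h]; simp [ih]
    | none => rw [greedyS_concat_none rs q lx g p]; simp [ih]

theorem greedyS_pointwise (rs : List (Int × Option Int × Int)) (g p : Int) :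
    ∀ i (h : i < rs.length), ∃ v',
      (greedyS rs g p).1[i]? = some (rs[i].1, v', rs[i].2.2) ∧
      (v' = rs[i].2.1 ∨ v' = none) := by
  induction rs using List.reverseRecOn generalizing g p with
  | nil => intro i h; simp at h
  | append_singleton rs x ih =>
    intro i h
    obtain ⟨q, vx, lx⟩ := x
    by_cases hi : i < rs.length
    · have hget : (rs ++ [(q, vx, lx)])[i] = rs[i] := List.getElem_append_left hi
      have hmain : ∀ (l : List (Int × Option Int × Int)) (y : Int × Option Int × Int)
          (g' p' : Int), l = (greedyS rs g' p').1 →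
          ((l ++ [y])[i]? = (greedyS rs g' p').1[i]?) := by
        intro l y g' p' hl
        subst hl
        exact List.getElem?_append_left (by rw [greedyS_length]; exact hi)
      cases vx with
      | some v =>
        by_cases hf : lx ≤ g
        · rw [greedyS_concat_take rs q v lx g p hf]
          obtain ⟨v', h1, h2⟩ := ih (g - lx) (p + lx) i hi
          exact ⟨v', by rw [hmain _ _ _ _ rfl, h1, hget], by rw [hget]; exact h2⟩
        · rw [greedyS_concat_skip rs q v lx g p hf]
          obtain ⟨v', h1, h2⟩ := ih g p i hi
          exact ⟨v', by rw [hmain _ _ _ _ rfl, h1, hget], by rw [hget]; exact h2⟩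
      | none =>
        rw [greedyS_concat_none rs q lx g p]
        obtain ⟨v', h1, h2⟩ := ih g p i hi
        exact ⟨v', by rw [hmain _ _ _ _ rfl, h1, hget], by rw [hget]; exact h2⟩
    · have hieq : i = rs.length := by simp at h; omega
      subst hieq
      have hget : (rs ++ [(q, vx, lx)])[rs.length] = (q, vx, lx) := by
        rw [List.getElem_append_right (le_refl _)]
        simp
      have hmain : ∀ (l : List (Int × Option Int × Int)) (y : Int × Option Int × Int)
          (g' p' : Int), l = (greedyS rs g' p').1 → ((l ++ [y])[rs.length]? = some y) := by
        intro l y g' p' hl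
        subst hl
        rw [List.getElem?_append_right (by rw [greedyS_length])]
        rw [greedyS_length]
        simp
      cases vx with
      | some v =>
        by_cases hf : lx ≤ g
        · rw [greedyS_concat_take rs q v lx g p hf]
          exact ⟨none, by rw [hmain _ _ _ _ rfl, hget], Or.inr rfl⟩
        · rw [greedyS_concat_skip rs q v lx g p hf]
          exact ⟨some v, by rw [hmain _ _ _ _ rfl, hget], Or.inl (by rw [hget])⟩
      | none =>
        rw [greedyS_concat_none rs q lx g p]
        exact ⟨none, by rw [hmain _ _ _ _ rfl, hget], Or.inl (by rw [hget])⟩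

theorem greedyS_zero (rs : List (Int × Option Int × Int)) (g p : Int)
    (hlen : ∀ r ∈ rs, r.2.1.isSome = true → 1 ≤ r.2.2) (hg : g ≤ 0) :
    greedyS rs g p = (rs, 0) := by
  induction rs using List.reverseRecOn generalizing g p with
  | nil => rfl
  | append_singleton rs x ih =>
    obtain ⟨q, vx, lx⟩ := x
    have hlen' : ∀ r ∈ rs, r.2.1.isSome = true → 1 ≤ r.2.2 := fun r hr =>
      hlen r (List.mem_append_left _ hr)
    cases vx with
    | some v =>
      have h1 : 1 ≤ lx := hlen (q, some v, lx) (List.mem_append_right _ List.mem_cons_self)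
        (by simp)
      rw [greedyS_concat_skip rs q v lx g p (by omega), ih g p hlen' hg]
    | none => rw [greedyS_concat_none rs q lx g p, ih g p hlen' hg]

-- ---- consequences of the skeleton lemma ----

theorem filesOfS_mem {f : Int × Int × Int} {l : List (Int × Option Int × Int)}
    (h : f ∈ filesOfS l) : (f.1, some f.2.1, f.2.2) ∈ l := by
  unfold filesOfS at h
  rw [List.mem_filterMap] at h
  obtain ⟨r, hr, he⟩ := h
  cases hv : r.2.1 with
  | none => rw [hv] at he; simp at he
  | some x =>
    rw [hv] at he
    simp only [Option.map_some, Option.some_inj] at he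
    have : r = (f.1, some f.2.1, f.2.2) := by
      obtain ⟨a, b, c⟩ := r
      simp only at hv
      subst hv
      cases he
      rfl
    rw [← this]
    exact hr

theorem gapsOfS_mem {gp : Int × Int} {l : List (Int × Option Int × Int)}
    (h : gp ∈ gapsOfS l) : (gp.1, none, gp.2) ∈ l := by
  unfold gapsOfS at h
  rw [List.mem_filterMap] at h
  obtain ⟨r, hr, he⟩ := h
  cases hv : r.2.1 with
  | some x => rw [hv] at he; simp at he
  | none =>
    rw [hv] at he
    simp only [Option.isSome_none, Bool.false_eq_true, if_false, Option.some_inj] at he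
    have : r = (gp.1, none, gp.2) := by
      obtain ⟨a, b, c⟩ := r
      simp only at hv
      subst hv
      cases he
      rfl
    rw [← this]
    exact hr

theorem greedyS_run_mem {rs : List (Int × Option Int × Int)} {g p : Int}
    {r' : Int × Option Int × Int} (h : r' ∈ (greedyS rs g p).1) :
    ∃ r ∈ rs, r'.1 = r.1 ∧ r'.2.2 = r.2.2 ∧ (r'.2.1 = r.2.1 ∨ r'.2.1 = none) := by
  obtain ⟨i, hi, hget⟩ := List.mem_iff_getElem.mp h
  have hi' : i < rs.length := by rw [greedyS_length] at hi; exact hi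
  obtain ⟨v', h1, h2⟩ := greedyS_pointwise rs g p i hi'
  have : (greedyS rs g p).1[i]? = some r' := by
    rw [List.getElem?_eq_some_iff]
    exact ⟨hi, hget⟩
  rw [this] at h1
  cases h1
  exact ⟨rs[i], List.getElem_mem hi', by simp, by simp, by simpa using h2⟩

theorem filesOfS_greedyS_mem {rs : List (Int × Option Int × Int)} {g p : Int}
    {f : Int × Int × Int} (h : f ∈ filesOfS (greedyS rs g p).1) :
    (f.1, some f.2.1, f.2.2) ∈ rs := by
  have := filesOfS_mem h
  obtain ⟨r, hr, h1, h2, h3⟩ := greedyS_run_mem this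
  rcases h3 with h3 | h3
  · have : r = (f.1, some f.2.1, f.2.2) := by
      obtain ⟨a, b, c⟩ := r
      simp only at h1 h2 h3
      simp [← h1, ← h2, ← h3]
    rw [← this]; exact hr
  · simp at h3

def InvS (rs : List (Int × Option Int × Int)) : Prop :=
  (∀ r ∈ rs, 0 ≤ r.2.2) ∧ (∀ r ∈ rs, r.2.1.isSome = true → 1 ≤ r.2.2) ∧
    rs.Pairwise (fun a b => a.1 + a.2.2 ≤ b.1)

theorem greedyS_inv {rs : List (Int × Option Int × Int)} {g p : Int} (h : InvS rs) :
    InvS (greedyS rs g p).1 := by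
  obtain ⟨h0, h1, h2⟩ := h
  refine ⟨?_, ?_, ?_⟩
  · intro r' hr'
    obtain ⟨r, hr, _, hl, _⟩ := greedyS_run_mem hr'
    rw [hl]; exact h0 r hr
  · intro r' hr' hs
    obtain ⟨r, hr, _, hl, hv⟩ := greedyS_run_mem hr'
    rcases hv with hv | hv
    · rw [hl]; exact h1 r hr (by rw [← hv]; exact hs)
    · rw [hv] at hs; simp at hs
  · rw [List.pairwise_iff_getElem] at h2 ⊢
    intro i j hi hj hij
    have hi' : i < rs.length := by rw [greedyS_length] at hi; exact hi
    have hj' : j < rs.length := by rw [greedyS_length] at hj; exact hj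
    obtain ⟨vi, hgi, _⟩ := greedyS_pointwise rs g p i hi'
    obtain ⟨vj, hgj, _⟩ := greedyS_pointwise rs g p j hj'
    obtain ⟨_, hgi'⟩ := List.getElem?_eq_some_iff.mp hgi
    obtain ⟨_, hgj'⟩ := List.getElem?_eq_some_iff.mp hgj
    rw [hgi', hgj']
    exact h2 i j hi' hj' hij

-- ---- a run that never fits passes through the inner sweep untouched ----

theorem innerS_trail : ∀ (fuel : Nat) (rs : List (Int × Option Int × Int))
    (z : Int × Option Int × Int) (g p : Int),
    (∀ r ∈ rs, r.2.1.isSome = true → 1 ≤ r.2.2) → (z.2.1 = none ∨ g < z.2.2) →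
    innerS fuel (rs ++ [z]) g p = ((innerS fuel rs g p).1 ++ [z], (innerS fuel rs g p).2) := by
  intro fuel
  induction fuel with
  | zero => intro rs z g p hlen hz; rfl
  | succ fuel ih =>
    intro rs z g p hlen hz
    by_cases hg : g = 0
    · subst hg; rw [innerS_succ_zero, innerS_succ_zero]
    · have hpz : (z.2.1.isSome && decide (z.2.2 ≤ g)) = false := by
        rcases hz with hz | hz
        · simp [hz]
        · simp [show ¬ z.2.2 ≤ g by omega]
      have hcat := lastIdx?_concat (fun r => r.2.1.isSome && decide (r.2.2 ≤ g)) rs z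
      rw [hpz] at hcat
      simp only [Bool.false_eq_true, if_false] at hcat
      cases hl : lastIdx? (fun r => r.2.1.isSome && decide (r.2.2 ≤ g)) rs with
      | none =>
        rw [innerS_succ_none fuel p hg (by rw [hcat, hl]),
          innerS_succ_none fuel p hg hl]
      | some j =>
        obtain ⟨hlt, hp⟩ := lastIdx?_some hl
        simp only [Bool.and_eq_true, decide_eq_true_eq] at hp
        have hget2 : (rs ++ [z]).getD j (0, none, 0) = rs.getD j (0, none, 0) :=
          List.getD_append rs [z] _ j hlt
        have hset2 : ∀ y, (rs ++ [z]).set j y = rs.set j y ++ [z] := fun y =>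
          List.set_append_left j y hlt
        rw [innerS_succ_some fuel p hg (by rw [hcat, hl]),
          innerS_succ_some fuel p hg hl, hget2, hset2]
        have hgd : rs.getD j (0, none, 0) = rs[j] := List.getD_eq_getElem _ _ hlt
        have hlen1 : 1 ≤ rs[j].2.2 := hlen rs[j] (List.getElem_mem hlt) hp.1
        have := ih (rs.set j ((rs.getD j (0, none, 0)).1, none, (rs.getD j (0, none, 0)).2.2))
          z (g - (rs.getD j (0, none, 0)).2.2) (p + (rs.getD j (0, none, 0)).2.2)
          (by
            intro r hr
            rcases List.mem_or_eq_of_mem_set hr with h1 | h1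
            · exact hlen r h1
            · subst h1; intro hcon; simp at hcon)
          (by
            rcases hz with hz | hz
            · exact Or.inl hz
            · right; rw [hgd]; omega)
        rw [this]

-- ---- the inner sweep equals the right-to-left greedy scan ----

theorem fcS_le (rs : List (Int × Option Int × Int)) : fcS rs ≤ rs.length :=
  List.length_filter_le _ _

theorem fcS_append (rs : List (Int × Option Int × Int)) (z : Int × Option Int × Int) :
    fcS (rs ++ [z]) = fcS rs + (if z.2.1.isSome then 1 else 0) := by
  unfold fcS
  rw [List.filter_append]
  cases h : z.2.1.isSome <;> simp [h]

theorem innerS_eq_greedyS : ∀ (rs : List (Int × Option Int × Int)) (g p : Int) (fuel : Nat),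
    fcS rs < fuel → (∀ r ∈ rs, r.2.1.isSome = true → 1 ≤ r.2.2) → 0 ≤ g →
    innerS fuel rs g p = greedyS rs g p := by
  intro rs
  induction rs using List.reverseRecOn with
  | nil =>
    intro g p fuel hfuel hlen hg
    cases fuel with
    | zero => omega
    | succ fuel =>
      by_cases hg0 : g = 0
      · subst hg0; rw [innerS_succ_zero]; rfl
      · rw [innerS_succ_none fuel p hg0 (by rfl)]; rfl
  | append_singleton rs x ih =>
    intro g p fuel hfuel hlen hg
    obtain ⟨q, vx, lx⟩ := x
    have hlen' : ∀ r ∈ rs, r.2.1.isSome = true → 1 ≤ r.2.2 := fun r hr =>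
      hlen r (List.mem_append_left _ hr)
    cases fuel with
    | zero => omega
    | succ fuel =>
      by_cases hg0 : g = 0
      · subst hg0
        rw [innerS_succ_zero, greedyS_zero _ _ _ hlen (le_refl 0)]
      · cases vx with
        | some v =>
          by_cases hf : lx ≤ g
          · -- the rightmost run fits: it is picked first
            have hpx : ((q, some v, lx).2.1.isSome &&
                decide ((q, some v, lx).2.2 ≤ g)) = true := by simp [hf]
            have hcat := lastIdx?_concat (fun r => r.2.1.isSome && decide (r.2.2 ≤ g)) rs
              (q, some v, lx)
            rw [if_pos hpx] at hcat
            have hlt : rs.length < (rs ++ [(q, some v, lx)]).length := by simp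
            have hget : (rs ++ [(q, some v, lx)]).getD rs.length (0, none, 0) =
                (q, some v, lx) := by
              rw [List.getD_eq_getElem _ _ hlt]
              rw [List.getElem_append_right (le_refl _)]
              simp
            have hset : (rs ++ [(q, some v, lx)]).set rs.length (q, none, lx) =
                rs ++ [(q, none, lx)] := by
              rw [List.set_append_right _ _ (le_refl _)]
              simp
            rw [innerS_succ_some fuel p hg0 hcat, hget]
            simp only
            rw [hset]
            have h1lx : 1 ≤ lx := hlen (q, some v, lx)
              (List.mem_append_right _ List.mem_cons_self) (by simp)
            have htrail := innerS_trail fuel (rs) (q, none, lx) (g - lx) (p + lx) hlen'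
              (Or.inl rfl)
            rw [htrail]
            have hihs := ih (g - lx) (p + lx) fuel
              (by rw [fcS_append] at hfuel; simp at hfuel; omega) hlen' (by omega)
            rw [hihs, greedyS_concat_take rs q v lx g p hf]
            simp
          · -- too large for the remaining capacity: passes through
            have htrail := innerS_trail (fuel + 1) rs (q, some v, lx) g p hlen'
              (Or.inr (by simp; omega))
            rw [htrail]
            have hihs := ih g p (fuel + 1)
              (by rw [fcS_append] at hfuel; simp at hfuel; omega) hlen' hg
            rw [hihs, greedyS_concat_skip rs q v lx g p hf]
        | none =>
          have htrail := innerS_trail (fuel + 1) rs (q, none, lx) g p hlen' (Or.inl rfl)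
          rw [htrail]
          have hihs := ih g p (fuel + 1)
            (by rw [fcS_append] at hfuel; simp at hfuel; omega) hlen' hg
          rw [hihs, greedyS_concat_none rs q lx g p]

-- ---- the file-driven pass: gap-search lemmas ----

theorem placeB_nohit (gs : List (Int × Int)) (fp ln : Int)
    (h : ∀ g ∈ gs, ¬ (g.1 < fp ∧ ln ≤ g.2)) : placeB gs fp ln = (fp, gs) := by
  induction gs with
  | nil => rfl
  | cons g t ih =>
    obtain ⟨gp, gl⟩ := g
    rw [placeB, if_neg (h (gp, gl) List.mem_cons_self)]
    rw [ih (fun g hg => h g (List.mem_cons_of_mem _ hg))]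

theorem placeB_pos_mono (gs : List (Int × Int)) (fp ln : Int) (hln : 0 ≤ ln) :
    ∀ g' ∈ (placeB gs fp ln).2, ∃ g ∈ gs, g.1 ≤ g'.1 := by
  induction gs with
  | nil => intro g' h; simp [placeB] at h
  | cons g t ih =>
    obtain ⟨gp, gl⟩ := g
    intro g' h
    rw [placeB] at h
    by_cases hc : gp < fp ∧ ln ≤ gl
    · rw [if_pos hc] at h
      simp only at h
      rcases List.mem_cons.mp h with h1 | h1
      · exact ⟨(gp, gl), List.mem_cons_self, by rw [h1]; simp only; omega⟩
      · exact ⟨g', List.mem_cons_of_mem _ h1, le_refl _⟩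
    · rw [if_neg hc] at h
      simp only at h
      rcases List.mem_cons.mp h with h1 | h1
      · exact ⟨(gp, gl), List.mem_cons_self, by rw [h1]⟩
      · obtain ⟨g0, hg0, hle⟩ := ih g' h1
        exact ⟨g0, List.mem_cons_of_mem _ hg0, hle⟩

theorem placeB_append (a b : List (Int × Int)) (fp ln : Int) :
    placeB (a ++ b) fp ln =
      if a.any (fun gr => decide (gr.1 < fp) && decide (ln ≤ gr.2)) then
        ((placeB a fp ln).1, (placeB a fp ln).2 ++ b)
      else ((placeB b fp ln).1, a ++ (placeB b fp ln).2) := by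
  induction a with
  | nil => simp [placeB]
  | cons g t ih =>
    obtain ⟨gp, gl⟩ := g
    by_cases hc : gp < fp ∧ ln ≤ gl
    · rw [List.cons_append, placeB, if_pos hc, placeB, if_pos hc]
      simp only [List.any_cons]
      rw [if_pos (by simp; omega)]
      simp
    · rw [List.cons_append, placeB, if_neg hc, placeB, if_neg hc, ih]
      simp only [List.any_cons]
      have hcb : (decide (gp < fp) && decide (ln ≤ gl)) = false := by
        simp only [Bool.and_eq_false_iff, decide_eq_false_iff_not]
        omega
      rw [hcb]
      simp only [Bool.false_or]
      by_cases ha : t.any (fun gr => decide (gr.1 < fp) && decide (ln ≤ gr.2)) = true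
      · rw [if_pos ha, if_pos ha]
        simp
      · rw [if_neg ha, if_neg ha]
        simp

-- a file with all gaps at or right of it stays in place and changes nothing
theorem CfunS_last (fs : List (Int × Int × Int)) (fp fid ln : Int) :
    ∀ gs : List (Int × Int), (∀ g ∈ gs, ¬ g.1 < fp) → (∀ f ∈ fs, 0 ≤ f.2.2) →
    CfunS (fs ++ [(fp, fid, ln)]) gs = CfunS fs gs + fid * (ln * fp + ln * (ln - 1) / 2) := by
  induction fs with
  | nil =>
    intro gs h _
    have := placeB_nohit gs fp ln (fun g hg => by
      intro hc
      exact h g hg hc.1)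
    simp [CfunS, this]
  | cons f t ih =>
    intro gs h hpos
    obtain ⟨fp', fid', ln'⟩ := f
    have hln' : (0 : Int) ≤ ln' := hpos (fp', fid', ln') List.mem_cons_self
    rw [List.cons_append, CfunS, CfunS, ih _ (by
      intro g' hg'
      obtain ⟨g0, hg0, hle⟩ := placeB_pos_mono gs fp' ln' hln' g' hg'
      have := h g0 hg0
      omega) (fun f' hf' => hpos f' (List.mem_cons_of_mem _ hf'))]
    ring

-- a gap no remaining file can use is transparent to the file-driven pass
theorem CfunS_dropgap (fs : List (Int × Int × Int)) (q l : Int) :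
    ∀ gs1 gs2 : List (Int × Int), (∀ f ∈ fs, ¬ (q < f.1 ∧ f.2.2 ≤ l)) →
    CfunS fs (gs1 ++ (q, l) :: gs2) = CfunS fs (gs1 ++ gs2) := by
  induction fs with
  | nil => intro gs1 gs2 h; rfl
  | cons f t ih =>
    intro gs1 gs2 h
    obtain ⟨fp, fid, ln⟩ := f
    have hne : (decide (q < fp) && decide (ln ≤ l)) = false := by
      have := h (fp, fid, ln) List.mem_cons_self
      simp only [Bool.and_eq_false_iff, decide_eq_false_iff_not]
      simp only at this
      omega
    have ht : ∀ f' ∈ t, ¬ (q < f'.1 ∧ f'.2.2 ≤ l) := fun f' hf' =>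
      h f' (List.mem_cons_of_mem _ hf')
    rw [CfunS, CfunS]
    rw [placeB_append gs1 ((q, l) :: gs2) fp ln, placeB_append gs1 gs2 fp ln]
    by_cases ha : gs1.any (fun gr => decide (gr.1 < fp) && decide (ln ≤ gr.2)) = true
    · rw [if_pos ha, if_pos ha]
      simp only
      rw [show (placeB gs1 fp ln).2 ++ (q, l) :: gs2 =
        (placeB gs1 fp ln).2 ++ (q, l) :: gs2 from rfl]
      rw [ih ((placeB gs1 fp ln).2) gs2 ht]
    · rw [if_neg ha, if_neg ha]
      simp only
      rw [show placeB ((q, l) :: gs2) fp ln =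
        ((placeB gs2 fp ln).1, (q, l) :: (placeB gs2 fp ln).2) from by
          rw [placeB, if_neg (by
            simp only [Bool.and_eq_false_iff, decide_eq_false_iff_not] at hne
            omega)]]
      simp only
      have := ih (gs1 ++ (q, l) :: (placeB gs2 fp ln).2)
      rw [show gs1 ++ (q, l) :: (placeB gs2 fp ln).2 =
        gs1 ++ (q, l) :: (placeB gs2 fp ln).2 from rfl]
      rw [ih gs1 ((placeB gs2 fp ln).2) ht]

-- ---- the exchange lemma: peeling the leftmost gap ----

theorem CfunS_exchange : ∀ (rs : List (Int × Option Int × Int)) (g p : Int)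
    (G : List (Int × Int)),
    (∀ f ∈ filesOfS rs, p + g ≤ f.1) →
    (∀ r ∈ rs, r.2.1.isSome = true → 1 ≤ r.2.2) → 0 ≤ g →
    CfunS (filesOfS rs).reverse ((p, g) :: G) =
      (greedyS rs g p).2 + CfunS (filesOfS (greedyS rs g p).1).reverse G := by
  intro rs
  induction rs using List.reverseRecOn with
  | nil => intro g p G h1 hlen hg; simp [greedyS_nil, filesOfS, CfunS]
  | append_singleton rs x ih =>
    intro g p G h1 hlen hg
    obtain ⟨q, vx, lx⟩ := x
    have hlen' : ∀ r ∈ rs, r.2.1.isSome = true → 1 ≤ r.2.2 := fun r hr =>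
      hlen r (List.mem_append_left _ hr)
    have hfapp : filesOfS (rs ++ [(q, vx, lx)]) =
        filesOfS rs ++ filesOfS [(q, vx, lx)] := by
      unfold filesOfS; rw [List.filterMap_append]
    cases vx with
    | some v =>
      have hxfile : filesOfS [(q, some v, lx)] = [(q, v, lx)] := by
        simp [filesOfS]
      have hrev : (filesOfS (rs ++ [(q, some v, lx)])).reverse =
          (q, v, lx) :: (filesOfS rs).reverse := by
        rw [hfapp, hxfile, List.reverse_append]
        simp
      have h1' : ∀ f ∈ filesOfS rs, p + g ≤ f.1 := fun f hf =>
        h1 f (by rw [hfapp]; exact List.mem_append_left _ hf)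
      have h1lx : 1 ≤ lx := hlen (q, some v, lx)
        (List.mem_append_right _ List.mem_cons_self) (by simp)
      have hpq : p + g ≤ q := h1 (q, v, lx) (by
        rw [hfapp, hxfile]; exact List.mem_append_right _ List.mem_cons_self)
      by_cases hf : lx ≤ g
      · -- placed into the head gap, at its cursor
        rw [hrev, CfunS]
        have hplace : placeB ((p, g) :: G) q lx = (p, (p + lx, g - lx) :: G) := by
          rw [placeB, if_pos (by constructor <;> omega)]
        rw [hplace]
        simp only
        rw [ih (g - lx) (p + lx) G (by intro f hf'; have := h1' f hf'; omega) hlen'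
          (by omega)]
        rw [greedyS_concat_take rs q v lx g p hf]
        simp only
        rw [show filesOfS ((greedyS rs (g - lx) (p + lx)).1 ++ [(q, none, lx)]) =
            filesOfS (greedyS rs (g - lx) (p + lx)).1 from by
          unfold filesOfS; rw [List.filterMap_append]; simp]
        ring
      · -- does not fit the head gap: both sides search the tail gap list
        rw [hrev, CfunS]
        have hplace : placeB ((p, g) :: G) q lx =
            ((placeB G q lx).1, (p, g) :: (placeB G q lx).2) := by
          rw [placeB, if_neg (by omega)]
        rw [hplace]
        simp only
        rw [ih g p ((placeB G q lx).2) h1' hlen' hg]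
        rw [greedyS_concat_skip rs q v lx g p hf]
        simp only
        rw [show filesOfS ((greedyS rs g p).1 ++ [(q, some v, lx)]) =
            filesOfS (greedyS rs g p).1 ++ [(q, v, lx)] from by
          unfold filesOfS; rw [List.filterMap_append]; simp]
        rw [List.reverse_append]
        simp only [List.reverse_cons, List.reverse_nil, List.nil_append,
          List.singleton_append]
        rw [CfunS]
        ring
    | none =>
      have hxfile : filesOfS [(q, (none : Option Int), lx)] = [] := by simp [filesOfS]
      have hrev : filesOfS (rs ++ [(q, (none : Option Int), lx)]) = filesOfS rs := by
        rw [hfapp, hxfile]; simp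
      have h1' : ∀ f ∈ filesOfS rs, p + g ≤ f.1 := fun f hf => h1 f (by rw [hrev]; exact hf)
      rw [hrev, ih g p G h1' hlen' hg, greedyS_concat_none rs q lx g p]
      simp only
      rw [show filesOfS ((greedyS rs g p).1 ++ [(q, (none : Option Int), lx)]) =
          filesOfS (greedyS rs g p).1 from by
        unfold filesOfS; rw [List.filterMap_append]; simp]

-- ---- gaps created by the sweep are unusable by the remaining files ----

theorem gapsOfS_append (l1 l2 : List (Int × Option Int × Int)) :
    gapsOfS (l1 ++ l2) = gapsOfS l1 ++ gapsOfS l2 := by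
  unfold gapsOfS; rw [List.filterMap_append]

theorem filesOfS_append (l1 l2 : List (Int × Option Int × Int)) :
    filesOfS (l1 ++ l2) = filesOfS l1 ++ filesOfS l2 := by
  unfold filesOfS; rw [List.filterMap_append]

theorem CfunS_multi : ∀ (rs : List (Int × Option Int × Int)) (g p : Int)
    (fs0 : List (Int × Int × Int)) (gsE : List (Int × Int)),
    (∀ f ∈ fs0, g < f.2.2) →
    (∀ r ∈ rs, r.2.1.isSome = true → 1 ≤ r.2.2) →
    rs.Pairwise (fun a b => a.1 + a.2.2 ≤ b.1) → 0 ≤ g →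
    CfunS (fs0 ++ (filesOfS (greedyS rs g p).1).reverse) (gapsOfS (greedyS rs g p).1 ++ gsE)
      = CfunS (fs0 ++ (filesOfS (greedyS rs g p).1).reverse) (gapsOfS rs ++ gsE) := by
  intro rs
  induction rs using List.reverseRecOn with
  | nil => intro g p fs0 gsE _ _ _ _; rfl
  | append_singleton rs x ih =>
    intro g p fs0 gsE h0 hlen hpw hg
    obtain ⟨q, vx, lx⟩ := x
    have hlen' : ∀ r ∈ rs, r.2.1.isSome = true → 1 ≤ r.2.2 := fun r hr =>
      hlen r (List.mem_append_left _ hr)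
    obtain ⟨hpw', _, hcross⟩ := List.pairwise_append.mp hpw
    have hcross' : ∀ a ∈ rs, a.1 + a.2.2 ≤ q := fun a ha =>
      hcross a ha (q, vx, lx) List.mem_cons_self
    cases vx with
    | some v =>
      have h1lx : 1 ≤ lx := hlen (q, some v, lx)
        (List.mem_append_right _ List.mem_cons_self) (by simp)
      by_cases hf : lx ≤ g
      · rw [greedyS_concat_take rs q v lx g p hf]
        simp only
        rw [filesOfS_append, gapsOfS_append]
        rw [show filesOfS [((q : Int), (none : Option Int), lx)] = [] from by
          simp [filesOfS]]
        rw [show gapsOfS [((q : Int), (none : Option Int), lx)] = [(q, lx)] from by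
          simp [gapsOfS]]
        rw [List.append_nil]
        rw [show (gapsOfS (greedyS rs (g - lx) (p + lx)).1 ++ [(q, lx)]) ++ gsE =
          gapsOfS (greedyS rs (g - lx) (p + lx)).1 ++ (q, lx) :: gsE from by simp]
        rw [CfunS_dropgap _ q lx _ _ (by
          intro f hfm
          rcases List.mem_append.mp hfm with hf1 | hf1
          · have := h0 f hf1
            omega
          · rw [List.mem_reverse] at hf1
            have hrun := filesOfS_greedyS_mem hf1
            have hc := hcross' _ hrun
            simp only at hc
            have hl1 : 1 ≤ f.2.2 := hlen' _ hrun (by simp)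
            omega)]
        rw [show gapsOfS (rs ++ [((q : Int), some v, lx)]) = gapsOfS rs from by
          rw [gapsOfS_append]; simp [gapsOfS]]
        exact ih (g - lx) (p + lx) fs0 gsE (fun f hf1 => by have := h0 f hf1; omega)
          hlen' hpw' (by omega)
      · rw [greedyS_concat_skip rs q v lx g p hf]
        simp only
        rw [filesOfS_append, gapsOfS_append]
        rw [show filesOfS [((q : Int), some v, lx)] = [(q, v, lx)] from by simp [filesOfS]]
        rw [show gapsOfS [((q : Int), some v, lx)] = [] from by simp [gapsOfS]]
        rw [List.append_nil, List.reverse_append]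
        simp only [List.reverse_cons, List.reverse_nil, List.nil_append,
          List.singleton_append]
        rw [show fs0 ++ (q, v, lx) :: (filesOfS (greedyS rs g p).1).reverse =
          (fs0 ++ [(q, v, lx)]) ++ (filesOfS (greedyS rs g p).1).reverse from by simp]
        rw [show gapsOfS (rs ++ [((q : Int), some v, lx)]) = gapsOfS rs from by
          rw [gapsOfS_append]; simp [gapsOfS]]
        exact ih g p (fs0 ++ [(q, v, lx)]) gsE (by
          intro f hfm
          rcases List.mem_append.mp hfm with hf1 | hf1
          · exact h0 f hf1
          · rcases List.mem_singleton.mp hf1 with rfl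
            simp only
            omega) hlen' hpw' hg
    | none =>
      rw [greedyS_concat_none rs q lx g p]
      simp only
      rw [filesOfS_append, gapsOfS_append]
      rw [show filesOfS [((q : Int), (none : Option Int), lx)] = [] from by simp [filesOfS]]
      rw [show gapsOfS [((q : Int), (none : Option Int), lx)] = [(q, lx)] from by
        simp [gapsOfS]]
      rw [List.append_nil]
      rw [show gapsOfS (rs ++ [((q : Int), (none : Option Int), lx)]) =
        gapsOfS rs ++ [(q, lx)] from by rw [gapsOfS_append]; simp [gapsOfS]]
      rw [show (gapsOfS (greedyS rs g p).1 ++ [(q, lx)]) ++ gsE =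
        gapsOfS (greedyS rs g p).1 ++ (q, lx) :: gsE from by simp]
      rw [show (gapsOfS rs ++ [(q, lx)]) ++ gsE = gapsOfS rs ++ (q, lx) :: gsE from by simp]
      exact ih g p fs0 ((q, lx) :: gsE) h0 hlen' hpw' hg

-- ---- the main exchange theorem: gap-driven sweep = file-driven pass ----

theorem outerS_eq_CfunS : ∀ (n : Nat) (rs : List (Int × Option Int × Int)),
    rs.length = n → InvS rs → outerS n rs = CfunS (filesOfS rs).reverse (gapsOfS rs) := by
  intro n
  induction n using Nat.strong_induction_on with
  | _ n ih =>
    intro rs hn hinv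
    obtain ⟨h0, h1, h2⟩ := hinv
    cases rs with
    | nil =>
      subst hn
      rfl
    | cons r rest =>
      obtain ⟨p, v, l⟩ := r
      have hn' : n = rest.length + 1 := by simpa using hn.symm
      subst hn'
      have hhead : ∀ b ∈ rest, p + l ≤ b.1 := (List.pairwise_cons.mp h2).1
      have h2' : rest.Pairwise (fun a b => a.1 + a.2.2 ≤ b.1) :=
        (List.pairwise_cons.mp h2).2
      have h0' : ∀ r ∈ rest, 0 ≤ r.2.2 := fun r hr => h0 r (List.mem_cons_of_mem _ hr)
      have h1' : ∀ r ∈ rest, r.2.1.isSome = true → 1 ≤ r.2.2 := fun r hr =>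
        h1 r (List.mem_cons_of_mem _ hr)
      have hinv' : InvS rest := ⟨h0', h1', h2'⟩
      cases v with
      | some x =>
        have hstep : outerS (rest.length + 1) ((p, some x, l) :: rest) =
            x * (l * p + l * (l - 1) / 2) + outerS rest.length rest := rfl
        rw [hstep, ih rest.length (by omega) rest rfl hinv']
        have hl1 : (1 : Int) ≤ l := h1 (p, some x, l) List.mem_cons_self (by simp)
        have hfs : filesOfS ((p, some x, l) :: rest) = (p, x, l) :: filesOfS rest := by
          simp [filesOfS]
        have hgs : gapsOfS ((p, some x, l) :: rest) = gapsOfS rest := by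
          simp [gapsOfS]
        rw [hfs, hgs, List.reverse_cons]
        rw [CfunS_last (filesOfS rest).reverse p x l (gapsOfS rest)
          (by
            intro gp hgp
            have hrun := gapsOfS_mem hgp
            have := hhead _ hrun
            simp only at this
            omega)
          (by
            intro f hf
            rw [List.mem_reverse] at hf
            have hrun := filesOfS_mem hf
            have := h1' _ hrun (by simp)
            simp only at this
            omega)]
        ring
      | none =>
        have hstep : outerS (rest.length + 1) ((p, none, l) :: rest) =
            (innerS (rest.length + 1) rest l p).2 +
              outerS rest.length (innerS (rest.length + 1) rest l p).1 := rfl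
        have hg0 : (0 : Int) ≤ l := h0 (p, none, l) List.mem_cons_self
        have hJ : innerS (rest.length + 1) rest l p = greedyS rest l p :=
          innerS_eq_greedyS rest l p (rest.length + 1)
            (Nat.lt_succ_of_le (fcS_le rest)) h1' hg0
        rw [hstep, hJ]
        have hIH := ih rest.length (by omega) (greedyS rest l p).1
          (greedyS_length rest l p) (greedyS_inv hinv')
        rw [hIH]
        have hM := CfunS_multi rest l p [] [] (by intro f hf; simp at hf) h1' h2' hg0
        simp only [List.nil_append, List.append_nil] at hM
        rw [hM]
        have hK := CfunS_exchange rest l p (gapsOfS rest)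
          (by
            intro f hf
            have hrun := filesOfS_mem hf
            have := hhead _ hrun
            simpa using this)
          h1' hg0
        rw [← hK]
        have hfs : filesOfS ((p, (none : Option Int), l) :: rest) = filesOfS rest := by
          simp [filesOfS]
        have hgs : gapsOfS ((p, (none : Option Int), l) :: rest) =
            (p, l) :: gapsOfS rest := by
          simp [gapsOfS]
        rw [hfs, hgs]

-- ---- the one-pass builder produces exactly the files/gaps of the annotated runs ----

theorem buildFG_eq : ∀ (data : List Int) (k fid pend pos : Int)
    (files : List (Int × Int × Int)) (gaps : List (Int × Int)),
    buildFG data k fid pend pos files gaps =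
      (files ++ filesOfS (annR pos (buildGo data k fid pend [])),
       gaps ++ gapsOfS (annR pos (buildGo data k fid pend []))) := by
  intro data
  induction data with
  | nil =>
    intro k fid pend pos files gaps
    show (if pend > 0 then (files, gaps ++ [(pos, pend)]) else (files, gaps)) = _
    by_cases hp : pend > 0
    · rw [if_pos hp]
      rw [show buildGo [] k fid pend [] = [(none, pend)] from by simp [buildGo, hp]]
      simp [annR, filesOfS, gapsOfS]
    · rw [if_neg hp]
      rw [show buildGo [] k fid pend [] = [] from by simp [buildGo, hp]]
      simp [annR, filesOfS, gapsOfS]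
  | cons n0 rest ih =>
    intro k fid pend pos files gaps
    have hstep : buildFG (n0 :: rest) k fid pend pos files gaps =
        (if k % 2 = 0 then
          if (if n0 < 0 then (0 : Int) else n0) > 0 then
            buildFG rest (k + 1) (fid + 1) 0
              ((if pend > 0 then pos + pend else pos) + (if n0 < 0 then (0 : Int) else n0))
              (files ++ [((if pend > 0 then pos + pend else pos), fid,
                (if n0 < 0 then (0 : Int) else n0))])
              (if pend > 0 then gaps ++ [(pos, pend)] else gaps)
          else buildFG rest (k + 1) (fid + 1) pend pos files gaps
        else buildFG rest (k + 1) fid (pend + (if n0 < 0 then (0 : Int) else n0))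
          pos files gaps) := rfl
    rw [hstep, buildGo_step]
    by_cases hk : k % 2 = 0
    · rw [if_pos hk, if_pos hk]
      by_cases hn : (if n0 < 0 then (0 : Int) else n0) > 0
      · rw [if_pos hn, if_pos hn]
        rw [buildGo_acc rest (k + 1) (fid + 1) 0]
        rw [ih (k + 1) (fid + 1) 0 _ _ _]
        by_cases hp : pend > 0
        · rw [if_pos hp, if_pos hp, if_pos hp]
          simp only [List.nil_append, List.singleton_append, List.cons_append]
          simp only [annR, filesOfS, gapsOfS, List.filterMap_cons, Option.map_some,
            Option.isSome_some, Option.isSome_none, Bool.false_eq_true, if_false, if_true]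
          rw [Prod.mk.injEq]
          constructor <;> simp [List.append_assoc, filesOfS, gapsOfS]
        · rw [if_neg hp, if_neg hp, if_neg hp]
          simp only [List.nil_append, List.singleton_append, List.cons_append]
          simp only [annR, filesOfS, gapsOfS, List.filterMap_cons, Option.map_some,
            Option.isSome_some, if_true]
          rw [Prod.mk.injEq]
          constructor <;> simp [List.append_assoc, filesOfS, gapsOfS]
      · rw [if_neg hn, if_neg hn]
        exact ih (k + 1) (fid + 1) pend pos files gaps
    · rw [if_neg hk, if_neg hk]
      exact ih (k + 1) fid (pend + (if n0 < 0 then (0 : Int) else n0)) pos files gaps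

theorem loopB_eq : ∀ (fs : List (Int × Int × Int)) (gs : List (Int × Int)) (t : Int),
    loopB fs gs t = t + CfunS fs gs := by
  intro fs
  induction fs with
  | nil => intro gs t; simp [loopB, CfunS]
  | cons f fsr ih =>
    intro gs t
    obtain ⟨fp, fid, ln⟩ := f
    rw [loopB, CfunS, ih]
    ring

-- ---- annotated run facts for the initial run list ----

theorem annR_mem_snd {b : Int} {rs : List (Option Int × Int)}
    {r : Int × Option Int × Int} (h : r ∈ annR b rs) : r.2 ∈ rs := by
  induction rs generalizing b with
  | nil => simp [annR] at h
  | cons x t ih =>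
    rw [annR] at h
    rcases List.mem_cons.mp h with h1 | h1
    · subst h1; simp
    · exact List.mem_cons_of_mem _ (ih h1)

theorem annR_pos_le (rs : List (Option Int × Int)) : ∀ (b : Int),
    (∀ r ∈ rs, 0 ≤ r.2) → ∀ r' ∈ annR b rs, b ≤ r'.1 := by
  induction rs with
  | nil => intro b _ r' h; simp [annR] at h
  | cons x t ih =>
    intro b hlen r' h
    rw [annR] at h
    rcases List.mem_cons.mp h with h1 | h1
    · subst h1; simp
    · have := ih (b + x.2) (fun r hr => hlen r (List.mem_cons_of_mem _ hr)) r' h1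
      have hx : 0 ≤ x.2 := hlen x List.mem_cons_self
      omega

theorem annR_pairwise (rs : List (Option Int × Int)) : ∀ (b : Int),
    (∀ r ∈ rs, 0 ≤ r.2) →
    (annR b rs).Pairwise (fun a b' => a.1 + a.2.2 ≤ b'.1) := by
  induction rs with
  | nil => intro b _; simp [annR]
  | cons x t ih =>
    intro b hlen
    rw [annR]
    refine List.pairwise_cons.mpr ⟨?_, ih (b + x.2)
      (fun r hr => hlen r (List.mem_cons_of_mem _ hr))⟩
    intro r' hr'
    have := annR_pos_le t (b + x.2) (fun r hr => hlen r (List.mem_cons_of_mem _ hr)) r' hr'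
    simp only
    omega

theorem partTwo_main (data : List Int) : partTwo data = partTwo_alt data := by
  have hlens : ∀ r ∈ buildRuns data, (1 : Int) ≤ r.2 := by
    rw [buildRuns_eq]
    exact gb_len_pos (scanDisk data)
  have hinv : InvS (annR 0 (buildRuns data)) := by
    refine ⟨?_, ?_, ?_⟩
    · intro r hr
      have := hlens r.2 (annR_mem_snd hr)
      omega
    · intro r hr _
      exact hlens r.2 (annR_mem_snd hr)
    · exact annR_pairwise (buildRuns data) 0 (fun r hr => by have := hlens r hr; omega)
  have h1 : partTwo data = outerS (buildRuns data).length (annR 0 (buildRuns data)) := by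
    rw [A_to_outerB data, outer_bridge (buildRuns data).length (buildRuns data) 0 0]
    ring
  have h2 : outerS (buildRuns data).length (annR 0 (buildRuns data)) =
      CfunS (filesOfS (annR 0 (buildRuns data))).reverse
        (gapsOfS (annR 0 (buildRuns data))) :=
    outerS_eq_CfunS (buildRuns data).length (annR 0 (buildRuns data))
      (annR_length 0 (buildRuns data)) hinv
  have h3 : partTwo_alt data =
      CfunS (filesOfS (annR 0 (buildRuns data))).reverse
        (gapsOfS (annR 0 (buildRuns data))) := by
    unfold partTwo_alt
    rw [show buildFG data 0 0 0 0 [] [] =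
      (filesOfS (annR 0 (buildGo data 0 0 0 [])), gapsOfS (annR 0 (buildGo data 0 0 0 [])))
      from by rw [buildFG_eq data 0 0 0 0 [] []]; simp]
    rw [loopB_eq]
    show (0 : Int) + CfunS (filesOfS (annR 0 (buildRuns data))).reverse
      (gapsOfS (annR 0 (buildRuns data))) = _
    ring
  rw [h1, h2, ← h3]

-- ===== VERDICT (by name: the statement is the Claim_ definition above) =====
theorem partTwo_spec : Claim_equal_partTwo := by
  intro data _
  unfold Spec_partTwo
  exact partTwo_main data
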